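-- pv_equiv track=rewrite | github.com/hangunhee39/coding-Test | 프로그래머스/2/154540. 무인도 여행/무인도 여행.py | solution
-- ===== SOURCE A (Python) =====
-- from collections import deque
--
-- dx = [0, 1, 0, -1]
--
-- dy = [-1, 0, 1, 0]
--
-- def solution(maps):
--     maps = [list(row) for row in maps]
--
--     answer = []
--     len_y = len(maps)
--     len_x = len(maps[0])
--
--     def bfs(y, x):
--         q = deque([[y, x]])
--         tmp = int(maps[y][x])
--         maps[y][x] = 'X'
--
--         while q:
--             y, x = q.popleft()
--             for i in range(4):
--                 ny = y + dy[i]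
--                 nx = x + dx[i]
--
--                 if 0 <= ny < len_y and 0 <= nx < len_x and maps[ny][nx] != 'X':
--                     tmp += int(maps[ny][nx])
--                     maps[ny][nx] = 'X'
--                     q.append([ny, nx])
--         answer.append(tmp)
--
--     for y in range(len_y):
--         for x in range(len_x):
--             if maps[y][x] != 'X':
--                 bfs(y, x)
--
--     if len(answer) == 0 :
--         return [-1]
--     else :
--         return sorted(answer)
-- ===== SOURCE B (Python) =====
-- def solution(maps):
--     h = len(maps)
--     w = len(maps[0])
--     n = h * w
--     parent = list(range(n))
--
--     def find(i):
--         while parent[i] != i: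
--             parent[i] = parent[parent[i]]
--             i = parent[i]
--         return i
--
--     def union(a, b):
--         ra, rb = find(a), find(b)
--         if ra != rb:
--             if ra < rb:
--                 parent[ra] = rb
--             else:
--                 parent[rb] = ra
--
--     for y in range(h):
--         for x in range(w):
--             if maps[y][x] != 'X':
--                 i = y * w + x
--                 if x + 1 < w and maps[y][x + 1] != 'X':
--                     union(i, i + 1)
--                 if y + 1 < h and maps[y + 1][x] != 'X':
--                     union(i, i + w)
--
--     sums = {}
--     for y in range(h):
--         for x in range(w):
--             if maps[y][x] != 'X':
--                 r = find(y * w + x)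
--                 sums[r] = sums.get(r, 0) + int(maps[y][x])
--
--     return sorted(sums.values()) if sums else [-1]
-- ===== Notes on version B (the rewrite author's own statement) =====
-- stated objective: alternative
-- what changed: Replaces per-island BFS flood fill over a mutated grid copy by a union-find (disjoint-set forest with union-to-larger-index and path halving) over flattened cell indices: right/down land edges are unioned, then one pass accumulates each cell's value into an insertion-ordered dict keyed by its root, returning the sorted dict values.
import Mathlib
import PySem

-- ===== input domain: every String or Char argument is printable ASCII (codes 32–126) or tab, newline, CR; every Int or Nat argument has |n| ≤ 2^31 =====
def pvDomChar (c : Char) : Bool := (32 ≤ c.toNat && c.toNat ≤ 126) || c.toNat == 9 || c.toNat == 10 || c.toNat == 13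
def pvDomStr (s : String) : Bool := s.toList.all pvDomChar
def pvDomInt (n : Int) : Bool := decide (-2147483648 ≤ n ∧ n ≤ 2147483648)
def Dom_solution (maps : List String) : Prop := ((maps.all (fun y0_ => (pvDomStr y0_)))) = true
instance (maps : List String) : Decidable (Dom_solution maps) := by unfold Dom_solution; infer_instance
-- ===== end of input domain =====

-- B replaces A's per-island BFS over a mutated grid copy by a union-find (disjoint-set forest
-- with union-to-larger-index and path halving) over flattened cell indices, then one accumulation
-- pass into an insertion-ordered dict keyed by roots (alternative data structure, similar cost).

-- int(c) for a single char: exact on the ASCII digit chars '0'..'9', the only chars Pre_solution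
-- admits on scanned land cells (on any other scanned char Python raises ValueError, excluded by Pre_).
def chVal (c : Char) : Int := (c.toNat : Int) - 48

-- ===== PORT A =====
-- maps[y][x] on the mutable list-of-lists grid; guarded accesses are always in range under Pre_.
def gget (g : List (List Char)) (y x : Nat) : Char := (g.getD y []).getD x 'X'
-- maps[y][x] = 'X'
def gset (g : List (List Char)) (y x : Nat) : List (List Char) := g.set y ((g.getD y []).set x 'X')
-- the (dy[i], dx[i]) pairs in A's loop order i = 0..3
def dirsA : List (Int × Int) := [(-1, 0), (0, 1), (1, 0), (0, -1)]

-- body of A's `for i in range(4)` for one direction: state (grid, queue, tmp)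
def bfsStep (lenY lenX : Nat) (y x : Nat)
    (st : List (List Char) × List (Nat × Nat) × Int) (d : Int × Int) :
    List (List Char) × List (Nat × Nat) × Int :=
  let ny : Int := (y : Int) + d.1
  let nx : Int := (x : Int) + d.2
  if 0 ≤ ny ∧ ny < (lenY : Int) ∧ 0 ≤ nx ∧ nx < (lenX : Int) ∧ gget st.1 ny.toNat nx.toNat ≠ 'X' then
    (gset st.1 ny.toNat nx.toNat, st.2.1 ++ [(ny.toNat, nx.toNat)],
     st.2.2 + chVal (gget st.1 ny.toNat nx.toNat))
  else st

-- A's `while q` loop; fuel lenY*lenX+1 (each cell enqueued at most once; proved sufficient below)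
def bfsA (lenY lenX : Nat) : Nat → List (List Char) → List (Nat × Nat) → Int → Int × List (List Char)
  | 0, g, _, tmp => (tmp, g)
  | _ + 1, g, [], tmp => (tmp, g)
  | fuel + 1, g, (y, x) :: qs, tmp =>
      let st := dirsA.foldl (bfsStep lenY lenX y x) (g, qs, tmp)
      bfsA lenY lenX fuel st.1 st.2.1 st.2.2

def solution (maps : List String) : List Int :=
  match maps with
  | [] => []   -- Python raises IndexError at maps[0]; excluded by Pre_solution
  | r0 :: _ =>
    let g0 := maps.map String.toList
    let lenY := g0.length
    let lenX := r0.toList.length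
    let res := (List.range lenY).foldl (fun st y =>
      (List.range lenX).foldl (fun (st : List (List Char) × List Int) x =>
        if gget st.1 y x ≠ 'X' then
          let tmp0 := chVal (gget st.1 y x)
          let r := bfsA lenY lenX (lenY * lenX + 1) (gset st.1 y x) [(y, x)] tmp0
          (r.2, st.2 ++ [r.1])
        else st) st) (g0, ([] : List Int))
    if res.2.length = 0 then [-1] else PySem.List.sorted res.2 (fun v => v) false

-- ===== PORT B =====
-- maps[y][x] on the untouched list of strings
def mget (maps : List String) (y x : Nat) : Char := ((maps.getD y "").toList).getD x 'X'

-- B's `find`: follow parent pointers with path halving (parent[i] = parent[parent[i]]; i = parent[i]).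
-- Fuel n: parents strictly increase along a chain (invariant proved below), so n steps suffice.
def dsuFind : Nat → List Nat → Nat → List Nat × Nat
  | 0, par, i => (par, i)
  | fuel + 1, par, i =>
      let p := par.getD i i
      if p = i then (par, i)
      else
        let g := par.getD p p
        dsuFind fuel (par.set i g) g

-- B's `union`: attach the smaller root below the larger
def dsuUnion (n : Nat) (par : List Nat) (a b : Nat) : List Nat :=
  let fa := dsuFind n par a
  let fb := dsuFind n fa.1 b
  if fa.2 = fb.2 then fb.1
  else if fa.2 < fb.2 then fb.1.set fa.2 fb.2 else fb.1.set fb.2 fa.2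

def solution_alt (maps : List String) : List Int :=
  match maps with
  | [] => []   -- Python raises IndexError at maps[0]; excluded by Pre_solution
  | r0 :: _ =>
    let h := maps.length
    let w := r0.toList.length
    let n := h * w
    let par1 := (List.range h).foldl (fun par y =>
      (List.range w).foldl (fun (par : List Nat) x =>
        if mget maps y x ≠ 'X' then
          let i := y * w + x
          let par :=
            if x + 1 < w ∧ mget maps y (x + 1) ≠ 'X' then dsuUnion n par i (i + 1) else par
          if y + 1 < h ∧ mget maps (y + 1) x ≠ 'X' then dsuUnion n par i (i + w) else par
        else par) par) (List.range n)
    let res := (List.range h).foldl (fun st y =>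
      (List.range w).foldl (fun (st : List Nat × PySem.Dict Nat Int) x =>
        if mget maps y x ≠ 'X' then
          let fr := dsuFind n st.1 (y * w + x)
          (fr.1, st.2.insert fr.2 (st.2.getD fr.2 0 + chVal (mget maps y x)))
        else st) st) (par1, (PySem.Dict.empty : PySem.Dict Nat Int))
    if res.2.values = [] then [-1]
    else PySem.List.sorted res.2.values (fun v => v) false

-- ===== PRECONDITION & SPEC =====
-- Pre_solution holds exactly where the Python A returns normally (inside Dom): maps nonempty,
-- no row shorter than row 0 (else maps[y][x] raises IndexError during the scan), and every cell
-- in the first len(maps[0]) columns a decimal digit or 'X' (else int(...) raises ValueError).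
def Pre_solution (maps : List String) : Prop :=
  maps ≠ [] ∧ ∀ row ∈ maps, maps.headI.toList.length ≤ row.toList.length ∧
    ∀ x : Nat, x < maps.headI.toList.length →
      (row.toList.getD x 'X' = 'X' ∨ (row.toList.getD x 'X').isDigit)
instance (maps : List String) : Decidable (Pre_solution maps) := by unfold Pre_solution; infer_instance

def pvWitness_solution : List String := ["X591X", "14XX1", "XX2X3"]

def Spec_solution (maps : List String) (out : List Int) : Prop := out = solution_alt maps
instance (maps : List String) (out : List Int) : Decidable (Spec_solution maps out) := by unfold Spec_solution; infer_instance

-- ===== CLAIM (what is proved, stated in full; the proofs are below) =====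
def Claim_equal_solution : Prop := ∀ (maps : List String), Dom_solution maps → Pre_solution maps → Spec_solution maps (solution maps)

-- ===== LEMMAS AND PROOFS =====

-- specification-side root function: follow parent pointers without mutation
def sroot (par : List Nat) : Nat → Nat → Nat
  | 0, i => i
  | fuel + 1, i => if par.getD i i = i then i else sroot par fuel (par.getD i i)

-- the disjoint-set invariant: parents in range and monotone (parent[i] ≥ i)
def DSUInv (n : Nat) (par : List Nat) : Prop :=
  par.length = n ∧ ∀ i < n, i ≤ par.getD i i ∧ par.getD i i < n

theorem getD_set_self (par : List Nat) (i g : Nat) (hi : i < par.length) :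
    (par.set i g).getD i i = g := by
  simp [List.getD, hi]

theorem getD_set_other (par : List Nat) (i g k : Nat) (hk : k ≠ i) :
    (par.set i g).getD k k = par.getD k k := by
  simp [List.getD, Ne.symm hk]

theorem sroot_out (par : List Nat) (f i : Nat) (h : par.length ≤ i) : sroot par f i = i := by
  cases f with
  | zero => rfl
  | succ f =>
    have hp : par.getD i i = i := by
      rw [List.getD_eq_getElem?_getD, List.getElem?_eq_none (by omega)]
      rfl
    simp only [sroot]
    rw [if_pos hp]

theorem sroot_fuel {n : Nat} {par : List Nat} (h : DSUInv n par) :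
    ∀ f1 f2 i, n ≤ f1 + i → n ≤ f2 + i → sroot par f1 i = sroot par f2 i := by
  have hlen := h.1
  intro f1
  induction f1 with
  | zero =>
    intro f2 i h1 _
    rw [sroot_out par f2 i (by omega)]
    rfl
  | succ f1 ih =>
    intro f2 i h1 h2
    by_cases hi : i < n
    · have hf2 : ∃ f2', f2 = f2' + 1 := ⟨f2 - 1, by omega⟩
      obtain ⟨f2', rfl⟩ := hf2
      simp only [sroot]
      by_cases hp : par.getD i i = i
      · rw [if_pos hp, if_pos hp]
      · rw [if_neg hp, if_neg hp]
        have hiv := h.2 i hi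
        exact ih f2' (par.getD i i) (by omega) (by omega)
    · rw [sroot_out par (f1 + 1) i (by omega), sroot_out par f2 i (by omega)]

theorem sroot_root_self {n : Nat} {par : List Nat} (h : DSUInv n par) (i : Nat)
    (hfix : par.getD i i = i) : sroot par n i = i := by
  cases n with
  | zero => rfl
  | succ n =>
    simp only [sroot]
    rw [if_pos hfix]

theorem sroot_step {n : Nat} {par : List Nat} (h : DSUInv n par) (i : Nat) (hi : i < n)
    (hp : par.getD i i ≠ i) : sroot par n i = sroot par n (par.getD i i) := by
  have hiv := h.2 i hi
  have hn : ∃ n', n = n' + 1 := ⟨n - 1, by omega⟩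
  obtain ⟨n', hn⟩ := hn
  calc sroot par n i = sroot par (n' + 1) i := by rw [hn]
    _ = sroot par n' (par.getD i i) := by rw [sroot]; rw [if_neg hp]
    _ = sroot par n (par.getD i i) := sroot_fuel h n' n (par.getD i i) (by omega) (by omega)

theorem sroot_fixpt {n : Nat} {par : List Nat} (h : DSUInv n par) :
    ∀ m i, i < n → n - i ≤ m →
      i ≤ sroot par n i ∧ sroot par n i < n ∧ par.getD (sroot par n i) (sroot par n i) = sroot par n i := by
  intro m
  induction m with
  | zero => intro i hi hm; omega
  | succ m ih =>
    intro i hi hm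
    by_cases hp : par.getD i i = i
    · rw [sroot_root_self h i hp]
      exact ⟨le_refl i, hi, hp⟩
    · have hiv := h.2 i hi
      rw [sroot_step h i hi hp]
      have := ih (par.getD i i) (by omega) (by omega)
      exact ⟨by omega, this.2.1, this.2.2⟩

theorem sroot_lt {n : Nat} {par : List Nat} (h : DSUInv n par) (i : Nat) (hi : i < n) :
    i ≤ sroot par n i ∧ sroot par n i < n ∧
      par.getD (sroot par n i) (sroot par n i) = sroot par n i :=
  sroot_fixpt h (n - i) i hi (by omega)

-- path halving (parent[i] := parent[parent[i]]) keeps the invariant and changes no root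
theorem sroot_halve {n : Nat} {par : List Nat} (h : DSUInv n par) (i : Nat) (hi : i < n)
    (hp : par.getD i i ≠ i) :
    DSUInv n (par.set i (par.getD (par.getD i i) (par.getD i i))) ∧
    ∀ k, sroot (par.set i (par.getD (par.getD i i) (par.getD i i))) n k = sroot par n k := by
  have hlen := h.1
  set p := par.getD i i with hpdef
  set g := par.getD p p with hgdef
  have hiv := h.2 i hi
  have hpv := h.2 p (by omega)
  have hInv' : DSUInv n (par.set i g) := by
    refine ⟨by simp [hlen], ?_⟩
    intro k hk
    by_cases hki : k = i
    · subst hki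
      rw [getD_set_self par k g (by omega)]
      omega
    · rw [getD_set_other par i g k hki]
      exact h.2 k hk
  refine ⟨hInv', ?_⟩
  have main : ∀ m k, k < n → n - k ≤ m → sroot (par.set i g) n k = sroot par n k := by
    intro m
    induction m with
    | zero => intro k hk hm; omega
    | succ m ih =>
      intro k hk hm
      by_cases hki : k = i
      · subst hki
        have hgetD : (par.set k g).getD k k = g := getD_set_self par k g (by omega)
        rw [sroot_step hInv' k hk (by rw [hgetD]; omega), hgetD]
        have h1 : sroot (par.set k g) n g = sroot par n g := ih g (by omega) (by omega)
        rw [h1, sroot_step h k hk hp, ← hpdef]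
        by_cases hpg : par.getD p p = p
        · rw [hgdef, hpg]
        · exact (sroot_step h p (by omega) hpg).symm
      · have hgetD : (par.set i g).getD k k = par.getD k k := getD_set_other par i g k hki
        by_cases hq : par.getD k k = k
        · rw [sroot_root_self hInv' k (by rw [hgetD]; exact hq), sroot_root_self h k hq]
        · have hkv := h.2 k hk
          rw [sroot_step hInv' k hk (by rw [hgetD]; exact hq), hgetD,
              sroot_step h k hk hq]
          exact ih (par.getD k k) (by omega) (by omega)
  intro k
  by_cases hk : k < n
  · exact main (n - k) k hk (by omega)
  · rw [sroot_out _ n k (by simp [hlen]; omega), sroot_out _ n k (by omega)]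

-- pointing root ra at root rb (ra < rb) merges exactly the class of ra into that of rb
theorem sroot_set_root {n : Nat} {par : List Nat} (h : DSUInv n par) (ra rb : Nat)
    (hra : ra < n) (hrb : rb < n) (hfa : par.getD ra ra = ra) (hfb : par.getD rb rb = rb)
    (hlt : ra < rb) :
    DSUInv n (par.set ra rb) ∧
    ∀ k, sroot (par.set ra rb) n k = if sroot par n k = ra then rb else sroot par n k := by
  have hlen := h.1
  have hInv' : DSUInv n (par.set ra rb) := by
    refine ⟨by simp [hlen], ?_⟩
    intro k hk
    by_cases hki : k = ra
    · subst hki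
      rw [getD_set_self par k rb (by omega)]
      omega
    · rw [getD_set_other par ra rb k hki]
      exact h.2 k hk
  refine ⟨hInv', ?_⟩
  have main : ∀ m k, k < n → n - k ≤ m →
      sroot (par.set ra rb) n k = if sroot par n k = ra then rb else sroot par n k := by
    intro m
    induction m with
    | zero => intro k hk hm; omega
    | succ m ih =>
      intro k hk hm
      by_cases hki : k = ra
      · subst hki
        have hgetD : (par.set k rb).getD k k = rb := getD_set_self par k rb (by omega)
        rw [sroot_step hInv' k hk (by omega), hgetD]
        have hfb' : (par.set k rb).getD rb rb = rb := by
          rw [getD_set_other par k rb rb (by omega)]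
          exact hfb
        rw [sroot_root_self hInv' rb hfb', sroot_root_self h k hfa]
        simp
      · have hgetD : (par.set ra rb).getD k k = par.getD k k := getD_set_other par ra rb k hki
        by_cases hq : par.getD k k = k
        · rw [sroot_root_self hInv' k (by rw [hgetD]; exact hq), sroot_root_self h k hq]
          simp [hki]
        · have hkv := h.2 k hk
          rw [sroot_step hInv' k hk (by rw [hgetD]; exact hq), hgetD,
              sroot_step h k hk hq]
          exact ih (par.getD k k) (by omega) (by omega)
  intro k
  by_cases hk : k < n
  · exact main (n - k) k hk (by omega)
  · rw [sroot_out _ n k (by simp [hlen]; omega), sroot_out _ n k (by omega)]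
    have hne : k ≠ ra := by omega
    simp [hne]

-- dsuFind returns the abstract root, keeps the invariant, and changes no root
theorem dsuFind_go {n : Nat} : ∀ (fuel : Nat) (par : List Nat) (i : Nat), DSUInv n par → i < n →
    n ≤ fuel + i →
    (dsuFind fuel par i).2 = sroot par n i ∧ DSUInv n (dsuFind fuel par i).1 ∧
    ∀ k, sroot (dsuFind fuel par i).1 n k = sroot par n k := by
  intro fuel
  induction fuel with
  | zero => intro par i h hi hf; omega
  | succ fuel ih =>
    intro par i h hi hf
    have hstep : dsuFind (fuel + 1) par i =
        (if par.getD i i = i then (par, i)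
         else dsuFind fuel (par.set i (par.getD (par.getD i i) (par.getD i i)))
           (par.getD (par.getD i i) (par.getD i i))) := rfl
    rw [hstep]
    by_cases hp : par.getD i i = i
    · rw [if_pos hp]
      exact ⟨(sroot_root_self h i hp).symm, h, fun k => rfl⟩
    · rw [if_neg hp]
      obtain ⟨hInv', hroots⟩ := sroot_halve h i hi hp
      have hiv := h.2 i hi
      have hpv := h.2 (par.getD i i) (by omega)
      have hrec := ih (par.set i (par.getD (par.getD i i) (par.getD i i)))
        (par.getD (par.getD i i) (par.getD i i)) hInv' (by omega) (by omega)
      refine ⟨?_, hrec.2.1, fun k => (hrec.2.2 k).trans (hroots k)⟩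
      rw [hrec.1, hroots, sroot_step h i hi hp]
      by_cases hpg : par.getD (par.getD i i) (par.getD i i) = par.getD i i
      · rw [hpg]
      · rw [sroot_step h (par.getD i i) (by omega) hpg]

theorem dsuFind_spec {n : Nat} {par : List Nat} (h : DSUInv n par) (i : Nat) (hi : i < n) :
    (dsuFind n par i).2 = sroot par n i ∧ DSUInv n (dsuFind n par i).1 ∧
    ∀ k, sroot (dsuFind n par i).1 n k = sroot par n k :=
  dsuFind_go n par i h hi (by omega)

-- the merge function of one union
def mergeR (ra rb r : Nat) : Nat := if r = ra ∨ r = rb then max ra rb else r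

theorem dsuUnion_spec {n : Nat} {par : List Nat} (h : DSUInv n par) (a b : Nat)
    (ha : a < n) (hb : b < n) :
    DSUInv n (dsuUnion n par a b) ∧
    ∀ k, sroot (dsuUnion n par a b) n k =
      mergeR (sroot par n a) (sroot par n b) (sroot par n k) := by
  obtain ⟨hfa2, hfaInv, hfaR⟩ := dsuFind_spec h a ha
  obtain ⟨hfb2, hfbInv, hfbR⟩ := dsuFind_spec hfaInv b hb
  set ra := sroot par n a with hradef
  set rb := sroot par n b with hrbdef
  have hrb' : (dsuFind n (dsuFind n par a).1 b).2 = rb := by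
    rw [hfb2, hfaR b]
  have hroots2 : ∀ k, sroot (dsuFind n (dsuFind n par a).1 b).1 n k = sroot par n k :=
    fun k => (hfbR k).trans (hfaR k)
  have hraP := sroot_lt h a ha
  have hrbP := sroot_lt h b hb
  have hfixa : (dsuFind n (dsuFind n par a).1 b).1.getD ra ra = ra := by
    have hx := sroot_lt hfbInv ra (by omega)
    have hr : sroot (dsuFind n (dsuFind n par a).1 b).1 n ra = ra := by
      rw [hroots2 ra]
      exact sroot_root_self h ra hraP.2.2
    rw [hr] at hx
    exact hx.2.2
  have hfixb : (dsuFind n (dsuFind n par a).1 b).1.getD rb rb = rb := by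
    have hx := sroot_lt hfbInv rb (by omega)
    have hr : sroot (dsuFind n (dsuFind n par a).1 b).1 n rb = rb := by
      rw [hroots2 rb]
      exact sroot_root_self h rb hrbP.2.2
    rw [hr] at hx
    exact hx.2.2
  have hU : dsuUnion n par a b =
      (if (dsuFind n par a).2 = (dsuFind n (dsuFind n par a).1 b).2 then
        (dsuFind n (dsuFind n par a).1 b).1
       else if (dsuFind n par a).2 < (dsuFind n (dsuFind n par a).1 b).2 then
        (dsuFind n (dsuFind n par a).1 b).1.set (dsuFind n par a).2 (dsuFind n (dsuFind n par a).1 b).2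
       else
        (dsuFind n (dsuFind n par a).1 b).1.set (dsuFind n (dsuFind n par a).1 b).2 (dsuFind n par a).2) := rfl
  rw [hU, hfa2, hrb']
  by_cases heq : ra = rb
  · rw [if_pos heq]
    refine ⟨hfbInv, fun k => ?_⟩
    rw [hroots2 k]
    unfold mergeR
    split_ifs with hc
    · rcases hc with hc | hc <;> omega
    · rfl
  · rw [if_neg heq]
    by_cases hlt : ra < rb
    · rw [if_pos hlt]
      obtain ⟨hInv', hR'⟩ := sroot_set_root hfbInv ra rb (by omega) (by omega) hfixa hfixb hlt
      refine ⟨hInv', fun k => ?_⟩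
      rw [hR' k, hroots2 k]
      unfold mergeR
      split_ifs with h1 h2 h2 <;> omega
    · rw [if_neg hlt]
      obtain ⟨hInv', hR'⟩ := sroot_set_root hfbInv rb ra (by omega) (by omega) hfixb hfixa (by omega)
      refine ⟨hInv', fun k => ?_⟩
      rw [hR' k, hroots2 k]
      unfold mergeR
      split_ifs with h1 h2 h2 <;> omega

-- value of a cell
def valAt (maps : List String) (p : Nat × Nat) : Int := chVal (mget maps p.1 p.2)
-- a land (non-'X', in-range) cell of the untouched grid, columns < w only
def isLand (maps : List String) (w : Nat) (p : Nat × Nat) : Prop :=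
  p.1 < maps.length ∧ p.2 < w ∧ mget maps p.1 p.2 ≠ 'X'
-- 4-adjacency
def nbrRel (p q : Nat × Nat) : Prop :=
  (q.2 = p.2 ∧ (q.1 = p.1 + 1 ∨ p.1 = q.1 + 1)) ∨ (q.1 = p.1 ∧ (q.2 = p.2 + 1 ∨ p.2 = q.2 + 1))
-- one flood step avoiding the already-consumed region S0
def stepRel (maps : List String) (w : Nat) (S0 : Nat × Nat → Prop) (p q : Nat × Nat) : Prop :=
  nbrRel p q ∧ isLand maps w q ∧ ¬ S0 q
def Reach (maps : List String) (w : Nat) (S0 : Nat × Nat → Prop) (s p : Nat × Nat) : Prop :=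
  Relation.ReflTransGen (stepRel maps w S0) s p
-- plain connectivity of the land graph
def Conn (maps : List String) (w : Nat) (s p : Nat × Nat) : Prop :=
  Reach maps w (fun _ => False) s p
-- invariants of a flood's visited set
def VGood (maps : List String) (w : Nat) (S0 : Nat × Nat → Prop) (s : Nat × Nat)
    (V : Finset (Nat × Nat)) : Prop :=
  ∀ p ∈ V, isLand maps w p ∧ ¬ S0 p ∧ Reach maps w S0 s p
def VClosed (maps : List String) (w : Nat) (S0 : Nat × Nat → Prop) (V : Finset (Nat × Nat)) : Prop :=
  ∀ p ∈ V, ∀ r, stepRel maps w S0 p r → r ∈ V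
-- A's mutable grid g = the original maps with exactly the cells satisfying P turned to 'X'
def Coup (maps : List String) (P : Nat × Nat → Prop) (g : List (List Char)) : Prop :=
  g.length = maps.length ∧ (∀ y, (g.getD y []).length = (maps.getD y "").toList.length) ∧
  (∀ p : Nat × Nat, (P p → gget g p.1 p.2 = 'X') ∧ (¬ P p → gget g p.1 p.2 = mget maps p.1 p.2))

theorem gget_gset_self (g : List (List Char)) (y x : Nat)
    (hy : y < g.length) (hx : x < (g.getD y []).length) : gget (gset g y x) y x = 'X' := by
  simp only [gget, gset, List.getD, List.getElem?_set]
  simp only [if_pos hy]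
  have hx' : x < (g[y]?.getD []).length := by simpa [List.getD] using hx
  simp [hx']

theorem gget_gset_other (g : List (List Char)) (y x y' x' : Nat) (h : (y', x') ≠ (y, x)) :
    gget (gset g y x) y' x' = gget g y' x' := by
  simp only [gget, gset, List.getD, List.getElem?_set]
  by_cases hyy : y = y'
  · subst hyy
    have hxx : x' ≠ x := by intro hc; exact h (by simp [hc])
    by_cases hlt : y < g.length
    · simp [hlt, Ne.symm hxx]
    · simp [hlt]
  · simp [hyy]

theorem gset_length (g : List (List Char)) (y x : Nat) : (gset g y x).length = g.length := by
  simp [gset]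

theorem gset_row_length (g : List (List Char)) (y x y' : Nat) :
    ((gset g y x).getD y' []).length = (g.getD y' []).length := by
  simp only [gset, List.getD, List.getElem?_set]
  by_cases hyy : y = y'
  · subst hyy
    by_cases hlt : y < g.length
    · simp [hlt]
    · simp [hlt]
  · simp [hyy]

theorem coup_congr (maps : List String) (P Q : Nat × Nat → Prop) (g : List (List Char))
    (h : ∀ p, P p ↔ Q p) (hc : Coup maps P g) : Coup maps Q g := by
  obtain ⟨h1, h2, h3⟩ := hc
  exact ⟨h1, h2, fun p => ⟨fun hq => (h3 p).1 ((h p).2 hq), fun hq => (h3 p).2 (fun hp => hq ((h p).1 hp))⟩⟩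

-- the two closed reachable sets of the same flood are the same set
theorem flood_unique (maps : List String) (w : Nat) (S0 : Nat × Nat → Prop) (s : Nat × Nat)
    (V1 V2 : Finset (Nat × Nat)) (s1 : s ∈ V1) (g1 : VGood maps w S0 s V1) (c1 : VClosed maps w S0 V1)
    (s2 : s ∈ V2) (g2 : VGood maps w S0 s V2) (c2 : VClosed maps w S0 V2) : V1 = V2 := by
  have key : ∀ (V : Finset (Nat × Nat)), s ∈ V → VClosed maps w S0 V →
      ∀ p, Reach maps w S0 s p → p ∈ V := by
    intro V hs hc p hr
    induction hr with
    | refl => exact hs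
    | tail _ hstep ih => exact hc _ ih _ hstep
  apply Finset.Subset.antisymm
  · intro p hp; exact key V2 s2 c2 p ((g1 p hp).2.2)
  · intro p hp; exact key V1 s1 c1 p ((g2 p hp).2.2)

-- direction offsets
def offs (y x : Nat) (d : Int × Int) (r : Nat × Nat) : Prop :=
  (r.1 : Int) = (y : Int) + d.1 ∧ (r.2 : Int) = (x : Int) + d.2

def dir4 (d : Int × Int) : Prop := d = (-1, 0) ∨ d = (1, 0) ∨ d = (0, -1) ∨ d = (0, 1)

theorem nbr_exists_offs (p r : Nat × Nat) (h : nbrRel p r) : ∃ d, dir4 d ∧ offs p.1 p.2 d r := by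
  unfold nbrRel at h
  rcases h with ⟨h2, h1 | h1⟩ | ⟨h1, h2 | h2⟩
  · exact ⟨(1, 0), Or.inr (Or.inl rfl), by unfold offs; constructor <;> push_cast <;> omega⟩
  · exact ⟨(-1, 0), Or.inl rfl, by unfold offs; constructor <;> push_cast <;> omega⟩
  · exact ⟨(0, 1), Or.inr (Or.inr (Or.inr rfl)), by unfold offs; constructor <;> push_cast <;> omega⟩
  · exact ⟨(0, -1), Or.inr (Or.inr (Or.inl rfl)), by unfold offs; constructor <;> push_cast <;> omega⟩

theorem offs_nbr (y x : Nat) (d : Int × Int) (hd : dir4 d) (r : Nat × Nat)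
    (ho : offs y x d r) : nbrRel (y, x) r := by
  obtain ⟨h1, h2⟩ := ho
  unfold nbrRel
  rcases hd with rfl | rfl | rfl | rfl <;> simp only at h1 h2 <;> [left; left; right; right] <;>
    constructor <;> omega

theorem offs_unique (y x : Nat) (d : Int × Int) (r r' : Nat × Nat)
    (h : offs y x d r) (h' : offs y x d r') : r = r' := by
  obtain ⟨a, b⟩ := h; obtain ⟨a', b'⟩ := h'
  have : r.1 = r'.1 := by omega
  have : r.2 = r'.2 := by omega
  exact Prod.ext ‹r.1 = r'.1› ‹r.2 = r'.2›

theorem nbr_symm (p q : Nat × Nat) (h : nbrRel p q) : nbrRel q p := by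
  unfold nbrRel at h ⊢
  tauto

theorem reach_land (maps : List String) (w : Nat) (S0 : Nat × Nat → Prop) (s p : Nat × Nat)
    (hs : isLand maps w s) (h : Reach maps w S0 s p) : isLand maps w p := by
  induction h with
  | refl => exact hs
  | tail _ hstep _ => exact hstep.2.1

theorem conn_symm (maps : List String) (w : Nat) (s p : Nat × Nat)
    (hs : isLand maps w s) (h : Conn maps w s p) : Conn maps w p s := by
  induction h with
  | refl => exact Relation.ReflTransGen.refl
  | @tail b c _ hstep ih =>
    have hb : isLand maps w b := reach_land maps w _ s b hs (by assumption)
    exact Relation.ReflTransGen.trans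
      (Relation.ReflTransGen.single ⟨nbr_symm b c hstep.1, hb, not_false⟩) ih

-- a plain-connectivity path from a fresh start never enters a closed consumed region
theorem reachS_of_conn (maps : List String) (w : Nat) (S : Nat × Nat → Prop)
    (hS : ∀ p, S p → ∀ r, stepRel maps w (fun _ => False) p r → S r)
    (s : Nat × Nat) (hs : isLand maps w s) (hns : ¬ S s) :
    ∀ p, Conn maps w s p → Reach maps w S s p ∧ ¬ S p := by
  intro p h
  induction h with
  | refl => exact ⟨Relation.ReflTransGen.refl, hns⟩
  | @tail b c hreach hstep ih =>
    obtain ⟨hr, hnb⟩ := ih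
    have hbland : isLand maps w b := reach_land maps w _ s b hs hreach
    have hnc : ¬ S c := by
      intro hc
      exact hnb (hS c hc b ⟨nbr_symm b c hstep.1, hbland, not_false⟩)
    exact ⟨hr.tail ⟨hstep.1, hstep.2.1, hnc⟩, hnc⟩

theorem foldA (maps : List String) (w : Nat) (hrow : ∀ row ∈ maps, w ≤ row.toList.length)
    (S0 : Nat × Nat → Prop) (s : Nat × Nat) (y x : Nat) :
    ∀ (ds : List (Int × Int)), (∀ d ∈ ds, dir4 d) →
    ∀ (g : List (List Char)) (qs : List (Nat × Nat)) (tmp : Int) (V : Finset (Nat × Nat)),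
    VGood maps w S0 s V → (y, x) ∈ V →
    Coup maps (fun p => S0 p ∨ p ∈ V) g →
    (∀ p ∈ qs, p ∈ V) → qs.Nodup → (y, x) ∉ qs →
    tmp = ∑ p ∈ V, valAt maps p →
    ∃ V₂ : Finset (Nat × Nat), V ⊆ V₂ ∧ VGood maps w S0 s V₂ ∧
      (let st := ds.foldl (bfsStep maps.length w y x) (g, qs, tmp);
       Coup maps (fun p => S0 p ∨ p ∈ V₂) st.1 ∧
       (∀ p ∈ st.2.1, p ∈ V₂) ∧ st.2.1.Nodup ∧ (y, x) ∉ st.2.1 ∧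
       (∀ p ∈ qs, p ∈ st.2.1) ∧
       st.2.2 = ∑ p ∈ V₂, valAt maps p ∧
       st.2.1.length + V.card = qs.length + V₂.card ∧
       (∀ p ∈ V₂, p ∈ V ∨ p ∈ st.2.1) ∧
       (∀ r, stepRel maps w S0 (y, x) r → (∃ d ∈ ds, offs y x d r) → r ∈ V₂)) := by
  intro ds
  induction ds with
  | nil =>
    intro _ g qs tmp V hV hyx hC hq hnd hynq htmp
    exact ⟨V, Finset.Subset.refl V, hV, hC, hq, hnd, hynq, fun p hp => hp, htmp,
      rfl, fun p hp => Or.inl hp, fun r _ hex => by rcases hex with ⟨d, hd, _⟩; cases hd⟩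
  | cons d ds ih =>
    intro hds g qs tmp V hV hyx hC hq hnd hynq htmp
    have hd4 : dir4 d := hds d (List.mem_cons_self ..)
    have hds' : ∀ d' ∈ ds, dir4 d' := fun d' hd' => hds d' (List.mem_cons_of_mem _ hd')
    simp only [List.foldl_cons]
    by_cases hG : 0 ≤ (y : Int) + d.1 ∧ (y : Int) + d.1 < (maps.length : Int) ∧
        0 ≤ (x : Int) + d.2 ∧ (x : Int) + d.2 < (w : Int) ∧
        gget g ((y : Int) + d.1).toNat ((x : Int) + d.2).toNat ≠ 'X'
    · -- accepted push
      obtain ⟨h0y, hly, h0x, hlx, hX⟩ := hG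
      set r : Nat × Nat := (((y : Int) + d.1).toNat, ((x : Int) + d.2).toNat) with hr
      have hr1 : (r.1 : Int) = (y : Int) + d.1 := Int.toNat_of_nonneg h0y
      have hr2 : (r.2 : Int) = (x : Int) + d.2 := Int.toNat_of_nonneg h0x
      have hoffs : offs y x d r := ⟨hr1, hr2⟩
      have hrV : ¬ S0 r ∧ r ∉ V := by
        by_contra hc
        have : S0 r ∨ r ∈ V := by tauto
        exact hX ((hC.2.2 r).1 this)
      have hmg : mget maps r.1 r.2 ≠ 'X' := by
        have := (hC.2.2 r).2 (by tauto)
        rwa [this] at hX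
      have hland : isLand maps w r := ⟨by omega, by omega, hmg⟩
      have hstep : stepRel maps w S0 (y, x) r := ⟨offs_nbr y x d hd4 r hoffs, hland, hrV.1⟩
      have hreach : Reach maps w S0 s r := ((hV _ hyx).2.2).tail hstep
      have hstepEq : bfsStep maps.length w y x (g, qs, tmp) d =
          (gset g r.1 r.2, qs ++ [r], tmp + chVal (gget g r.1 r.2)) := by
        simp only [bfsStep]
        rw [if_pos ⟨h0y, hly, h0x, hlx, hX⟩]
      have hglen : g.length = maps.length := hC.1
      have hrowlen : r.2 < (g.getD r.1 []).length := by
        have h1 : (g.getD r.1 []).length = (maps.getD r.1 "").toList.length := hC.2.1 r.1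
        have h2 : maps.getD r.1 "" ∈ maps := by
          rw [List.getD_eq_getElem?_getD, List.getElem?_eq_getElem (by omega : r.1 < maps.length)]
          exact List.getElem_mem _
        have := hrow _ h2
        omega
      have hgv : gget g r.1 r.2 = mget maps r.1 r.2 := (hC.2.2 r).2 (by tauto)
      have hCoup' : Coup maps (fun p => S0 p ∨ p ∈ insert r V) (gset g r.1 r.2) := by
        refine ⟨by rw [gset_length]; exact hglen, fun y' => by rw [gset_row_length]; exact hC.2.1 y', ?_⟩
        intro p
        constructor
        · intro hp
          by_cases hpr : p = r
          · rw [hpr]; exact gget_gset_self g r.1 r.2 (by omega) hrowlen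
          · rw [gget_gset_other g r.1 r.2 p.1 p.2 (by simpa [Prod.ext_iff] using hpr)]
            have : S0 p ∨ p ∈ V := by
              rcases hp with h | h
              · exact Or.inl h
              · rcases Finset.mem_insert.mp h with h | h
                · exact absurd h hpr
                · exact Or.inr h
            exact (hC.2.2 p).1 this
        · intro hp
          have hpr : p ≠ r := by intro hc; exact hp (Or.inr (by rw [hc]; exact Finset.mem_insert_self r V))
          rw [gget_gset_other g r.1 r.2 p.1 p.2 (by simpa [Prod.ext_iff] using hpr)]
          exact (hC.2.2 p).2 (by
            intro hc
            rcases hc with h | h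
            · exact hp (Or.inl h)
            · exact hp (Or.inr (Finset.mem_insert_of_mem h)))
      have hVG' : VGood maps w S0 s (insert r V) := by
        intro p hp
        rcases Finset.mem_insert.mp hp with h | h
        · subst h; exact ⟨hland, hrV.1, hreach⟩
        · exact hV p h
      have hrnotqs : r ∉ qs := fun hc => hrV.2 (hq r hc)
      obtain ⟨V₂, hsub, hVG₂, hrest⟩ := ih hds' (gset g r.1 r.2) (qs ++ [r])
        (tmp + chVal (gget g r.1 r.2)) (insert r V) hVG'
        (Finset.mem_insert_of_mem hyx) hCoup'
        (by intro p hp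
            rcases List.mem_append.mp hp with h | h
            · exact Finset.mem_insert_of_mem (hq p h)
            · simp at h; subst h; exact Finset.mem_insert_self r V)
        (by rw [List.nodup_append]
            refine ⟨hnd, List.nodup_singleton r, ?_⟩
            simp
            intro a b h hc
            exact hrnotqs (hc ▸ h))
        (by simp only [List.mem_append, List.mem_singleton]
            rintro (h | h)
            · exact hynq h
            · exact hrV.2 (h ▸ hyx))
        (by rw [htmp, hgv, Finset.sum_insert hrV.2]
            show (∑ p ∈ V, valAt maps p) + valAt maps r = valAt maps r + ∑ p ∈ V, valAt maps p
            ring)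
      refine ⟨V₂, fun p hp => hsub (Finset.mem_insert_of_mem hp), hVG₂, ?_⟩
      rw [hstepEq]
      obtain ⟨hC₂, hq₂, hnd₂, hynq₂, hqs₂, htmp₂, hcnt₂, hVq₂, hcl₂⟩ := hrest
      refine ⟨hC₂, hq₂, hnd₂, hynq₂,
        fun p hp => hqs₂ p (List.mem_append.mpr (Or.inl hp)), htmp₂, ?_, ?_, ?_⟩
      · have : (qs ++ [r]).length = qs.length + 1 := by simp
        have hcard : (insert r V).card = V.card + 1 := Finset.card_insert_of_notMem hrV.2
        omega
      · intro p hp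
        rcases hVq₂ p hp with h | h
        · rcases Finset.mem_insert.mp h with h | h
          · exact Or.inr (hqs₂ p (List.mem_append.mpr (Or.inr (by simp [h]))))
          · exact Or.inl h
        · exact Or.inr h
      · intro r' hstep' hex
        rcases hex with ⟨d', hd', ho'⟩
        rcases List.mem_cons.mp hd' with h | h
        · subst h
          rw [offs_unique y x d' r' r ho' hoffs]
          exact hsub (Finset.mem_insert_self r V)
        · exact hcl₂ r' hstep' ⟨d', h, ho'⟩
    · -- rejected: state unchanged; a stepRel-target through d must already be in V
      have hstepEq : bfsStep maps.length w y x (g, qs, tmp) d = (g, qs, tmp) := by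
        simp only [bfsStep]
        rw [if_neg hG]
      obtain ⟨V₂, hsub, hVG₂, hrest⟩ := ih hds' g qs tmp V hV hyx hC hq hnd hynq htmp
      refine ⟨V₂, hsub, hVG₂, ?_⟩
      rw [hstepEq]
      obtain ⟨hC₂, hq₂, hnd₂, hynq₂, hqs₂, htmp₂, hcnt₂, hVq₂, hcl₂⟩ := hrest
      refine ⟨hC₂, hq₂, hnd₂, hynq₂, hqs₂, htmp₂, hcnt₂, hVq₂, ?_⟩
      intro r hstep' hex
      rcases hex with ⟨d', hd', ho'⟩
      rcases List.mem_cons.mp hd' with h | h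
      · subst h
        obtain ⟨hnbr, hland, hnS0⟩ := hstep'
        obtain ⟨ho1, ho2⟩ := ho'
        have h0y : 0 ≤ (y : Int) + d'.1 := by omega
        have h0x : 0 ≤ (x : Int) + d'.2 := by omega
        have hty : ((y : Int) + d'.1).toNat = r.1 := by omega
        have htx : ((x : Int) + d'.2).toNat = r.2 := by omega
        have hrV : r ∈ V := by
          by_contra hc
          have hgr : gget g r.1 r.2 = mget maps r.1 r.2 := (hC.2.2 r).2 (by tauto)
          exact hG ⟨h0y, by have := hland.1; omega, h0x, by have := hland.2.1; omega,
            by rw [hty, htx, hgr]; exact hland.2.2⟩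
        exact hsub hrV
      · exact hcl₂ r hstep' ⟨d', h, ho'⟩

theorem dir4_mem_dirsA (d : Int × Int) (h : dir4 d) : d ∈ dirsA := by
  rcases h with rfl | rfl | rfl | rfl <;> simp [dirsA]

theorem dirsA_dir4 : ∀ d ∈ dirsA, dir4 d := by
  intro d hd; fin_cases hd <;> simp [dir4]

theorem vcard_le (maps : List String) (w : Nat) (S0 : Nat × Nat → Prop) (s : Nat × Nat)
    (V : Finset (Nat × Nat)) (hV : VGood maps w S0 s V) : V.card ≤ maps.length * w := by
  have hsub : V ⊆ Finset.range maps.length ×ˢ Finset.range w := by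
    intro p hp
    have h := (hV p hp).1
    simp only [Finset.mem_product, Finset.mem_range]
    exact ⟨h.1, h.2.1⟩
  calc V.card ≤ (Finset.range maps.length ×ˢ Finset.range w).card := Finset.card_le_card hsub
    _ = maps.length * w := by simp

theorem bfsA_run (maps : List String) (w : Nat) (hrow : ∀ row ∈ maps, w ≤ row.toList.length)
    (S0 : Nat × Nat → Prop) (s : Nat × Nat) :
    ∀ (fuel : Nat) (g : List (List Char)) (q : List (Nat × Nat)) (tmp : Int) (V : Finset (Nat × Nat)),
    VGood maps w S0 s V → s ∈ V →
    Coup maps (fun p => S0 p ∨ p ∈ V) g →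
    (∀ p ∈ q, p ∈ V) → q.Nodup →
    (∀ p ∈ V, p ∉ q → ∀ r, stepRel maps w S0 p r → r ∈ V) →
    tmp = ∑ p ∈ V, valAt maps p →
    q.length + (maps.length * w - V.card) < fuel →
    ∃ (V' : Finset (Nat × Nat)) (g' : List (List Char)),
      V ⊆ V' ∧ s ∈ V' ∧ VGood maps w S0 s V' ∧ VClosed maps w S0 V' ∧
      Coup maps (fun p => S0 p ∨ p ∈ V') g' ∧
      bfsA maps.length w fuel g q tmp = (∑ p ∈ V', valAt maps p, g') := by
  intro fuel
  induction fuel with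
  | zero => intro g q tmp V _ _ _ _ _ _ _ hf; omega
  | succ fuel ih =>
    intro g q tmp V hV hs hC hq hnd hcl htmp hf
    match q with
    | [] =>
      refine ⟨V, g, Finset.Subset.refl V, hs, hV, ?_, hC, by simp [bfsA, htmp]⟩
      intro p hp r hstep
      exact hcl p hp (by simp) r hstep
    | (y, x) :: qs =>
      have hyx : (y, x) ∈ V := hq _ (List.mem_cons_self ..)
      have hndqs : qs.Nodup := hnd.of_cons
      have hynq : (y, x) ∉ qs := by
        have := List.nodup_cons.mp hnd
        exact this.1
      obtain ⟨V₂, hsub, hVG₂, hrest⟩ := foldA maps w hrow S0 s y x dirsA dirsA_dir4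
        g qs tmp V hV hyx hC (fun p hp => hq p (List.mem_cons_of_mem _ hp)) hndqs hynq htmp
      obtain ⟨hC₂, hq₂, hnd₂, hynq₂, hqs₂, htmp₂, hcnt₂, hVq₂, hcl₂⟩ := hrest
      have hs₂ : s ∈ V₂ := hsub hs
      have hcl' : ∀ p ∈ V₂, p ∉ (dirsA.foldl (bfsStep maps.length w y x) (g, qs, tmp)).2.1 →
          ∀ r, stepRel maps w S0 p r → r ∈ V₂ := by
        intro p hp hpq r hstep
        rcases hVq₂ p hp with hpV | hpq'
        · by_cases hpyx : p = (y, x)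
          · subst hpyx
            obtain ⟨d, hd4, hoffs⟩ := nbr_exists_offs (y, x) r hstep.1
            exact hcl₂ r hstep ⟨d, dir4_mem_dirsA d hd4, hoffs⟩
          · have hpqs : p ∉ qs := fun hc => hpq (hqs₂ p hc)
            have := hcl p hpV (by
              intro hc
              rcases List.mem_cons.mp hc with h | h
              · exact hpyx h
              · exact hpqs h) r hstep
            exact hsub this
        · exact absurd hpq' hpq
      have hcard₂ : V₂.card ≤ maps.length * w := vcard_le maps w S0 s V₂ hVG₂
      have hcardle : V.card ≤ V₂.card := Finset.card_le_card hsub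
      obtain ⟨V', g', hsub', hs', hVG', hVC', hC', heq⟩ := ih
        (dirsA.foldl (bfsStep maps.length w y x) (g, qs, tmp)).1
        (dirsA.foldl (bfsStep maps.length w y x) (g, qs, tmp)).2.1
        (dirsA.foldl (bfsStep maps.length w y x) (g, qs, tmp)).2.2
        V₂ hVG₂ hs₂ hC₂ hq₂ hnd₂ hcl' htmp₂ (by simp at hf; omega)
      refine ⟨V', g', fun p hp => hsub' (hsub hp), hs', hVG', hVC', hC', ?_⟩
      rw [show bfsA maps.length w (fuel + 1) g ((y, x) :: qs) tmp =
        bfsA maps.length w fuel (dirsA.foldl (bfsStep maps.length w y x) (g, qs, tmp)).1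
          (dirsA.foldl (bfsStep maps.length w y x) (g, qs, tmp)).2.1
          (dirsA.foldl (bfsStep maps.length w y x) (g, qs, tmp)).2.2 from rfl]
      exact heq

-- flattened index of a cell
def cidx (w : Nat) (p : Nat × Nat) : Nat := p.1 * w + p.2

theorem cidx_lt (h w : Nat) (p : Nat × Nat) (h1 : p.1 < h) (h2 : p.2 < w) :
    cidx w p < h * w := by
  unfold cidx
  calc p.1 * w + p.2 < p.1 * w + w := by omega
    _ = (p.1 + 1) * w := by ring
    _ ≤ h * w := Nat.mul_le_mul_right w (by omega)

theorem cidx_inj (w : Nat) (p q : Nat × Nat) (hp : p.2 < w) (hq : q.2 < w)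
    (h : cidx w p = cidx w q) : p = q := by
  unfold cidx at h
  have h1 : p.1 = q.1 := by
    rcases Nat.lt_trichotomy p.1 q.1 with hlt | heq | hgt
    · have hle : (p.1 + 1) * w ≤ q.1 * w := Nat.mul_le_mul_right w (by omega)
      rw [Nat.succ_mul] at hle
      omega
    · exact heq
    · have hle : (q.1 + 1) * w ≤ p.1 * w := Nat.mul_le_mul_right w (by omega)
      rw [Nat.succ_mul] at hle
      omega
  rw [h1] at h
  exact Prod.ext h1 (by omega)

-- the union-phase invariant: DSU well-formed, every land cell's root is the index of a
-- connected land cell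
def GoodU (maps : List String) (w : Nat) (par : List Nat) : Prop :=
  DSUInv (maps.length * w) par ∧
  ∀ p : Nat × Nat, isLand maps w p → ∃ rc : Nat × Nat, isLand maps w rc ∧
    Conn maps w p rc ∧ sroot par (maps.length * w) (cidx w p) = cidx w rc

theorem union_good (maps : List String) (w : Nat) (par : List Nat) (a b : Nat × Nat)
    (hG : GoodU maps w par) (ha : isLand maps w a) (hb : isLand maps w b)
    (hab : nbrRel a b) :
    GoodU maps w (dsuUnion (maps.length * w) par (cidx w a) (cidx w b)) ∧
    (∀ k k', sroot par (maps.length * w) k = sroot par (maps.length * w) k' →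
      sroot (dsuUnion (maps.length * w) par (cidx w a) (cidx w b)) (maps.length * w) k =
      sroot (dsuUnion (maps.length * w) par (cidx w a) (cidx w b)) (maps.length * w) k') ∧
    sroot (dsuUnion (maps.length * w) par (cidx w a) (cidx w b)) (maps.length * w) (cidx w a) =
      sroot (dsuUnion (maps.length * w) par (cidx w a) (cidx w b)) (maps.length * w) (cidx w b) := by
  have hia : cidx w a < maps.length * w := cidx_lt maps.length w a ha.1 ha.2.1
  have hib : cidx w b < maps.length * w := cidx_lt maps.length w b hb.1 hb.2.1
  obtain ⟨hInv', hR⟩ := dsuUnion_spec hG.1 (cidx w a) (cidx w b) hia hib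
  obtain ⟨rca, hrca_land, hrca_conn, hrca_root⟩ := hG.2 a ha
  obtain ⟨rcb, hrcb_land, hrcb_conn, hrcb_root⟩ := hG.2 b hb
  have hconn_ab : Conn maps w a b := Relation.ReflTransGen.single ⟨hab, hb, not_false⟩
  have hconn_arcb : Conn maps w a rcb := Relation.ReflTransGen.trans hconn_ab hrcb_conn
  have hconn_rca_rcb : Conn maps w rca rcb :=
    Relation.ReflTransGen.trans (conn_symm maps w a rca ha hrca_conn) hconn_arcb
  have hconn_rcb_rca : Conn maps w rcb rca :=
    conn_symm maps w rca rcb hrca_land hconn_rca_rcb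
  refine ⟨⟨hInv', ?_⟩, ?_, ?_⟩
  · intro p hp
    obtain ⟨rc, hrc_land, hrc_conn, hrc_root⟩ := hG.2 p hp
    rw [hR (cidx w p), hrc_root]
    unfold mergeR
    by_cases hc : cidx w rc = sroot par (maps.length * w) (cidx w a) ∨
        cidx w rc = sroot par (maps.length * w) (cidx w b)
    · rw [if_pos hc]
      by_cases hm : sroot par (maps.length * w) (cidx w a) ≤ sroot par (maps.length * w) (cidx w b)
      · refine ⟨rcb, hrcb_land, ?_, ?_⟩
        · -- p ~ rc, rc = rca or rcb, both ~ rcb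
          rcases hc with hc | hc
          · rw [hrca_root] at hc
            have : rc = rca := cidx_inj w rc rca hrc_land.2.1 hrca_land.2.1 hc
            subst this
            exact Relation.ReflTransGen.trans hrc_conn hconn_rca_rcb
          · rw [hrcb_root] at hc
            have : rc = rcb := cidx_inj w rc rcb hrc_land.2.1 hrcb_land.2.1 hc
            subst this
            exact hrc_conn
        · rw [Nat.max_eq_right hm, hrcb_root]
      · refine ⟨rca, hrca_land, ?_, ?_⟩
        · rcases hc with hc | hc
          · rw [hrca_root] at hc
            have : rc = rca := cidx_inj w rc rca hrc_land.2.1 hrca_land.2.1 hc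
            subst this
            exact hrc_conn
          · rw [hrcb_root] at hc
            have : rc = rcb := cidx_inj w rc rcb hrc_land.2.1 hrcb_land.2.1 hc
            subst this
            exact Relation.ReflTransGen.trans hrc_conn hconn_rcb_rca
        · rw [Nat.max_eq_left (Nat.le_of_not_le hm), hrca_root]
    · rw [if_neg hc]
      exact ⟨rc, hrc_land, hrc_conn, rfl⟩
  · intro k k' he
    rw [hR k, hR k', he]
  · rw [hR (cidx w a), hR (cidx w b)]
    unfold mergeR
    rw [if_pos (Or.inl rfl), if_pos (Or.inr rfl)]

-- one scan cell of B's union phase (proof-side restatement of the loop body)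
def uCell (maps : List String) (h w n : Nat) (par : List Nat) (p : Nat × Nat) : List Nat :=
  if mget maps p.1 p.2 ≠ 'X' then
    (let i := p.1 * w + p.2
     let par1 :=
       if p.2 + 1 < w ∧ mget maps p.1 (p.2 + 1) ≠ 'X' then dsuUnion n par i (i + 1) else par
     if p.1 + 1 < h ∧ mget maps (p.1 + 1) p.2 ≠ 'X' then dsuUnion n par1 i (i + w) else par1)
  else par

theorem cidx_down (w : Nat) (p : Nat × Nat) : cidx w (p.1 + 1, p.2) = p.1 * w + p.2 + w := by
  show (p.1 + 1) * w + p.2 = p.1 * w + p.2 + w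
  ring

theorem uCell_spec (maps : List String) (w : Nat) (par : List Nat) (p : Nat × Nat)
    (hG : GoodU maps w par) (hy : p.1 < maps.length) (hx : p.2 < w) :
    GoodU maps w (uCell maps maps.length w (maps.length * w) par p) ∧
    (∀ k k', sroot par (maps.length * w) k = sroot par (maps.length * w) k' →
      sroot (uCell maps maps.length w (maps.length * w) par p) (maps.length * w) k =
      sroot (uCell maps maps.length w (maps.length * w) par p) (maps.length * w) k') ∧
    (mget maps p.1 p.2 ≠ 'X' →
      ((p.2 + 1 < w ∧ mget maps p.1 (p.2 + 1) ≠ 'X' →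
        sroot (uCell maps maps.length w (maps.length * w) par p) (maps.length * w) (p.1 * w + p.2) =
        sroot (uCell maps maps.length w (maps.length * w) par p) (maps.length * w) (p.1 * w + p.2 + 1)) ∧
       (p.1 + 1 < maps.length ∧ mget maps (p.1 + 1) p.2 ≠ 'X' →
        sroot (uCell maps maps.length w (maps.length * w) par p) (maps.length * w) (p.1 * w + p.2) =
        sroot (uCell maps maps.length w (maps.length * w) par p) (maps.length * w) (p.1 * w + p.2 + w)))) := by
  by_cases hl : mget maps p.1 p.2 ≠ 'X'
  · have hland : isLand maps w p := ⟨hy, hx, hl⟩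
    have hCell : uCell maps maps.length w (maps.length * w) par p =
        (if p.1 + 1 < maps.length ∧ mget maps (p.1 + 1) p.2 ≠ 'X' then
          dsuUnion (maps.length * w)
            (if p.2 + 1 < w ∧ mget maps p.1 (p.2 + 1) ≠ 'X'
             then dsuUnion (maps.length * w) par (p.1 * w + p.2) (p.1 * w + p.2 + 1) else par)
            (p.1 * w + p.2) (p.1 * w + p.2 + w)
         else
          (if p.2 + 1 < w ∧ mget maps p.1 (p.2 + 1) ≠ 'X'
           then dsuUnion (maps.length * w) par (p.1 * w + p.2) (p.1 * w + p.2 + 1) else par)) := by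
      unfold uCell
      rw [if_pos hl]
    by_cases hcr : p.2 + 1 < w ∧ mget maps p.1 (p.2 + 1) ≠ 'X'
    case pos =>
      have hrland : isLand maps w (p.1, p.2 + 1) := ⟨hy, hcr.1, hcr.2⟩
      have hnbr : nbrRel p (p.1, p.2 + 1) := by unfold nbrRel; right; exact ⟨rfl, Or.inl rfl⟩
      obtain ⟨hG1, hM1, hE1⟩ := union_good maps w par p (p.1, p.2 + 1) hG hland hrland hnbr
      by_cases hcd : p.1 + 1 < maps.length ∧ mget maps (p.1 + 1) p.2 ≠ 'X'
      case pos =>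
        have hdland : isLand maps w (p.1 + 1, p.2) := ⟨hcd.1, hx, hcd.2⟩
        have hnbrd : nbrRel p (p.1 + 1, p.2) := by unfold nbrRel; left; exact ⟨rfl, Or.inl rfl⟩
        obtain ⟨hG2, hM2, hE2⟩ := union_good maps w
          (dsuUnion (maps.length * w) par (cidx w p) (cidx w (p.1, p.2 + 1)))
          p (p.1 + 1, p.2) hG1 hland hdland hnbrd
        rw [cidx_down w p] at hG2 hM2 hE2
        have hCell2 : uCell maps maps.length w (maps.length * w) par p =
            dsuUnion (maps.length * w)
              (dsuUnion (maps.length * w) par (p.1 * w + p.2) (p.1 * w + p.2 + 1))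
              (p.1 * w + p.2) (p.1 * w + p.2 + w) := by
          rw [hCell, if_pos hcd, if_pos hcr]
        rw [hCell2]
        exact ⟨hG2, fun k k' he => hM2 k k' (hM1 k k' he),
          fun _ => ⟨fun _ => hM2 _ _ hE1, fun _ => hE2⟩⟩
      case neg =>
        have hCell2 : uCell maps maps.length w (maps.length * w) par p =
            dsuUnion (maps.length * w) par (p.1 * w + p.2) (p.1 * w + p.2 + 1) := by
          rw [hCell, if_neg hcd, if_pos hcr]
        rw [hCell2]
        exact ⟨hG1, hM1, fun _ => ⟨fun _ => hE1, fun hc => absurd hc hcd⟩⟩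
    case neg =>
      by_cases hcd : p.1 + 1 < maps.length ∧ mget maps (p.1 + 1) p.2 ≠ 'X'
      case pos =>
        have hdland : isLand maps w (p.1 + 1, p.2) := ⟨hcd.1, hx, hcd.2⟩
        have hnbrd : nbrRel p (p.1 + 1, p.2) := by unfold nbrRel; left; exact ⟨rfl, Or.inl rfl⟩
        obtain ⟨hG2, hM2, hE2⟩ := union_good maps w par p (p.1 + 1, p.2) hG hland hdland hnbrd
        rw [cidx_down w p] at hG2 hM2 hE2
        have hCell2 : uCell maps maps.length w (maps.length * w) par p =
            dsuUnion (maps.length * w) par (p.1 * w + p.2) (p.1 * w + p.2 + w) := by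
          rw [hCell, if_pos hcd, if_neg hcr]
        rw [hCell2]
        exact ⟨hG2, hM2, fun _ => ⟨fun hc => absurd hc hcr, fun _ => hE2⟩⟩
      case neg =>
        have hCell2 : uCell maps maps.length w (maps.length * w) par p = par := by
          rw [hCell, if_neg hcd, if_neg hcr]
        rw [hCell2]
        exact ⟨hG, fun k k' he => he, fun _ => ⟨fun hc => absurd hc hcr, fun hc => absurd hc hcd⟩⟩
  · have hCell : uCell maps maps.length w (maps.length * w) par p = par := by
      unfold uCell
      rw [if_neg hl]
    rw [hCell]
    exact ⟨hG, fun k k' he => he, fun hc => absurd hc hl⟩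

theorem ufold_good (maps : List String) (w : Nat) :
    ∀ (ps : List (Nat × Nat)) (par : List Nat), (∀ p ∈ ps, p.1 < maps.length ∧ p.2 < w) →
    GoodU maps w par →
    GoodU maps w (ps.foldl (uCell maps maps.length w (maps.length * w)) par) ∧
    (∀ k k', sroot par (maps.length * w) k = sroot par (maps.length * w) k' →
      sroot (ps.foldl (uCell maps maps.length w (maps.length * w)) par) (maps.length * w) k =
      sroot (ps.foldl (uCell maps maps.length w (maps.length * w)) par) (maps.length * w) k') := by
  intro ps
  induction ps with
  | nil => intro par _ hG; exact ⟨hG, fun k k' he => he⟩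
  | cons p ps ih =>
    intro par hps hG
    have hp := hps p (List.mem_cons_self ..)
    obtain ⟨hG1, hM1, _⟩ := uCell_spec maps w par p hG hp.1 hp.2
    obtain ⟨hG2, hM2⟩ := ih (uCell maps maps.length w (maps.length * w) par p)
      (fun q hq => hps q (List.mem_cons_of_mem _ hq)) hG1
    exact ⟨hG2, fun k k' he => hM2 k k' (hM1 k k' he)⟩

-- after the whole union phase, both applicable edges of every scanned land cell are merged
theorem ufold_edge (maps : List String) (w : Nat)
    (ps : List (Nat × Nat)) (par0 : List Nat) (hps : ∀ p ∈ ps, p.1 < maps.length ∧ p.2 < w)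
    (hG0 : GoodU maps w par0) (p : Nat × Nat) (hmem : p ∈ ps) (hl : mget maps p.1 p.2 ≠ 'X') :
    (p.2 + 1 < w ∧ mget maps p.1 (p.2 + 1) ≠ 'X' →
      sroot (ps.foldl (uCell maps maps.length w (maps.length * w)) par0) (maps.length * w) (p.1 * w + p.2) =
      sroot (ps.foldl (uCell maps maps.length w (maps.length * w)) par0) (maps.length * w) (p.1 * w + p.2 + 1)) ∧
    (p.1 + 1 < maps.length ∧ mget maps (p.1 + 1) p.2 ≠ 'X' →
      sroot (ps.foldl (uCell maps maps.length w (maps.length * w)) par0) (maps.length * w) (p.1 * w + p.2) =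
      sroot (ps.foldl (uCell maps maps.length w (maps.length * w)) par0) (maps.length * w) (p.1 * w + p.2 + w)) := by
  obtain ⟨l1, l2, rfl⟩ := List.append_of_mem hmem
  rw [List.foldl_append]
  have hl1 : ∀ q ∈ l1, q.1 < maps.length ∧ q.2 < w := by
    intro q hq; exact hps q (by simp [hq])
  have hp : p.1 < maps.length ∧ p.2 < w := hps p (by simp)
  obtain ⟨hG1, _⟩ := ufold_good maps w l1 par0 hl1 hG0
  obtain ⟨hG2, hM2, hE⟩ := uCell_spec maps w _ p hG1 hp.1 hp.2
  have hE' := hE hl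
  rw [List.foldl_cons]
  have hl2 : ∀ q ∈ l2, q.1 < maps.length ∧ q.2 < w := by
    intro q hq; exact hps q (by simp [hq])
  obtain ⟨_, hM3⟩ := ufold_good maps w l2 _ hl2 hG2
  exact ⟨fun hc => hM3 _ _ (hE'.1 hc), fun hc => hM3 _ _ (hE'.2 hc)⟩

-- a nested for-y/for-x foldl is the foldl over the flattened position list
theorem foldl_nested {α : Type} (f : α → Nat → Nat → α) (ys xs : List Nat) (init : α) :
    ys.foldl (fun st y => xs.foldl (fun st x => f st y x) st) init
      = (ys.flatMap (fun y => xs.map (fun x => (y, x)))).foldl (fun st p => f st p.1 p.2) init := by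
  induction ys generalizing init with
  | nil => rfl
  | cons y ys ih => simp [List.foldl_append, List.foldl_map, ih]

theorem mem_flat_pos (h w : Nat) (p : Nat × Nat)
    (hp : p ∈ (List.range h).flatMap (fun y => (List.range w).map (fun x => (y, x)))) :
    p.1 < h ∧ p.2 < w := by
  simp only [List.mem_flatMap, List.mem_map, List.mem_range] at hp
  obtain ⟨y, hy, x, hx, rfl⟩ := hp
  exact ⟨hy, hx⟩

theorem pos_mem_flat (h w : Nat) (p : Nat × Nat) (h1 : p.1 < h) (h2 : p.2 < w) :
    p ∈ (List.range h).flatMap (fun y => (List.range w).map (fun x => (y, x))) := by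
  simp only [List.mem_flatMap, List.mem_map, List.mem_range]
  exact ⟨p.1, h1, p.2, h2, rfl⟩

theorem allPos_nodup (h w : Nat) :
    ((List.range h).flatMap (fun y => (List.range w).map (fun x => (y, x)))).Nodup := by
  rw [List.nodup_flatMap]
  constructor
  · intro y _
    exact List.Nodup.map (fun a b hab => by simpa using hab) List.nodup_range
  · apply List.Pairwise.imp ?_ (List.nodup_range (n := h))
    intro a b hab
    simp only [List.disjoint_left]
    intro p hp hq
    simp only [List.mem_map, List.mem_range] at hp hq
    obtain ⟨x, _, rfl⟩ := hp
    obtain ⟨x', _, he⟩ := hq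
    have := congrArg Prod.fst he
    simp at this
    exact hab this.symm

-- the DSU array produced by B's union phase
def unionPar (maps : List String) (w : Nat) : List Nat :=
  ((List.range maps.length).flatMap (fun y => (List.range w).map (fun x => (y, x)))).foldl
    (uCell maps maps.length w (maps.length * w)) (List.range (maps.length * w))

-- root of a cell in the finished forest
def rootOf (maps : List String) (w : Nat) (p : Nat × Nat) : Nat :=
  sroot (unionPar maps w) (maps.length * w) (cidx w p)

-- the component of s, as a Finset, and its sum
def compCells (maps : List String) (w : Nat) (s : Nat × Nat) : Finset (Nat × Nat) :=
  (Finset.range maps.length ×ˢ Finset.range w).filter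
    (fun q => mget maps q.1 q.2 ≠ 'X' ∧ rootOf maps w q = rootOf maps w s)

def compSum (maps : List String) (w : Nat) (s : Nat × Nat) : Int :=
  ∑ q ∈ compCells maps w s, valAt maps q

-- the still-unscanned part of a component's sum
def subSum (maps : List String) (w : Nat) (todo : List (Nat × Nat)) (s : Nat × Nat) : Int :=
  ((todo.filter (fun q => decide (mget maps q.1 q.2 ≠ 'X') &&
      decide (rootOf maps w q = rootOf maps w s))).map (valAt maps)).sum

theorem subSum_nil (maps : List String) (w : Nat) (s : Nat × Nat) : subSum maps w [] s = 0 := rfl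

theorem par0_good (maps : List String) (w : Nat) :
    GoodU maps w (List.range (maps.length * w)) := by
  have hInv : DSUInv (maps.length * w) (List.range (maps.length * w)) := by
    refine ⟨List.length_range, ?_⟩
    intro i hi
    rw [List.getD_eq_getElem?_getD, List.getElem?_range hi]
    simp
    omega
  refine ⟨hInv, ?_⟩
  intro p hp
  refine ⟨p, hp, Relation.ReflTransGen.refl, ?_⟩
  apply sroot_root_self hInv
  rw [List.getD_eq_getElem?_getD,
    List.getElem?_range (cidx_lt maps.length w p hp.1 hp.2.1)]
  rfl

theorem unionPar_good (maps : List String) (w : Nat) : GoodU maps w (unionPar maps w) :=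
  (ufold_good maps w _ _ (fun p hp => mem_flat_pos maps.length w p hp) (par0_good maps w)).1

-- adjacent land cells end up with the same root
theorem adj_same (maps : List String) (w : Nat) (p q : Nat × Nat)
    (hp : isLand maps w p) (hq : isLand maps w q) (hnbr : nbrRel p q) :
    rootOf maps w p = rootOf maps w q := by
  have hedge : ∀ o : Nat × Nat, isLand maps w o →
      (o.2 + 1 < w ∧ mget maps o.1 (o.2 + 1) ≠ 'X' →
        sroot (unionPar maps w) (maps.length * w) (o.1 * w + o.2) =
        sroot (unionPar maps w) (maps.length * w) (o.1 * w + o.2 + 1)) ∧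
      (o.1 + 1 < maps.length ∧ mget maps (o.1 + 1) o.2 ≠ 'X' →
        sroot (unionPar maps w) (maps.length * w) (o.1 * w + o.2) =
        sroot (unionPar maps w) (maps.length * w) (o.1 * w + o.2 + w)) := by
    intro o ho
    exact ufold_edge maps w _ _ (fun r hr => mem_flat_pos maps.length w r hr)
      (par0_good maps w) o (pos_mem_flat maps.length w o ho.1 ho.2.1) ho.2.2
  unfold rootOf
  rcases hnbr with ⟨h2, h1 | h1⟩ | ⟨h1, h2 | h2⟩
  · -- q is below p
    have hqe : q = (p.1 + 1, p.2) := Prod.ext h1 h2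
    rw [hqe, cidx_down w p]
    exact (hedge p hp).2 ⟨by rw [← h1]; exact hq.1, by rw [hqe] at hq; exact hq.2.2⟩
  · -- p is below q
    have hpe : p = (q.1 + 1, q.2) := Prod.ext h1 h2.symm
    rw [hpe, cidx_down w q]
    exact ((hedge q hq).2 ⟨by rw [← h1]; exact hp.1, by rw [hpe] at hp; exact hp.2.2⟩).symm
  · -- q is right of p
    have hqe : q = (p.1, p.2 + 1) := Prod.ext h1 h2
    rw [hqe]
    have : cidx w (p.1, p.2 + 1) = p.1 * w + p.2 + 1 := by
      show p.1 * w + (p.2 + 1) = p.1 * w + p.2 + 1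
      omega
    rw [this]
    exact (hedge p hp).1 ⟨by rw [← h2]; exact hq.2.1, by rw [hqe] at hq; exact hq.2.2⟩
  · -- p is right of q
    have hpe : p = (q.1, q.2 + 1) := Prod.ext h1.symm h2
    rw [hpe]
    have : cidx w (q.1, q.2 + 1) = q.1 * w + q.2 + 1 := by
      show q.1 * w + (q.2 + 1) = q.1 * w + q.2 + 1
      omega
    rw [this]
    exact ((hedge q hq).1 ⟨by rw [← h2]; exact hp.2.1, by rw [hpe] at hp; exact hp.2.2⟩).symm

theorem conn_same (maps : List String) (w : Nat) (p q : Nat × Nat)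
    (hp : isLand maps w p) (h : Conn maps w p q) : rootOf maps w p = rootOf maps w q := by
  induction h with
  | refl => rfl
  | @tail b c hreach hstep ih =>
    have hb : isLand maps w b := reach_land maps w _ p b hp hreach
    exact ih.trans (adj_same maps w b c hb hstep.2.1 hstep.1)

theorem same_conn (maps : List String) (w : Nat) (p q : Nat × Nat)
    (hp : isLand maps w p) (hq : isLand maps w q) (h : rootOf maps w p = rootOf maps w q) :
    Conn maps w p q := by
  obtain ⟨rcp, hrcp_land, hrcp_conn, hrcp_root⟩ := (unionPar_good maps w).2 p hp
  obtain ⟨rcq, hrcq_land, hrcq_conn, hrcq_root⟩ := (unionPar_good maps w).2 q hq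
  have : rcp = rcq := by
    apply cidx_inj w rcp rcq hrcp_land.2.1 hrcq_land.2.1
    rw [← hrcp_root, ← hrcq_root]
    exact h
  subst this
  exact Relation.ReflTransGen.trans hrcp_conn (conn_symm maps w q rcp hq hrcq_conn)

-- A's scan body over a flattened (y, x) position
def stepScanA (maps : List String) (w : Nat) (st : List (List Char) × List Int)
    (p : Nat × Nat) : List (List Char) × List Int :=
  if gget st.1 p.1 p.2 ≠ 'X' then
    (let tmp0 := chVal (gget st.1 p.1 p.2);
     let r := bfsA maps.length w (maps.length * w + 1) (gset st.1 p.1 p.2) [(p.1, p.2)] tmp0;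
     (r.2, st.2 ++ [r.1]))
  else st

-- B's summing scan body
def stepScanB (maps : List String) (w : Nat) (st : List Nat × PySem.Dict Nat Int)
    (p : Nat × Nat) : List Nat × PySem.Dict Nat Int :=
  if mget maps p.1 p.2 ≠ 'X' then
    (let fr := dsuFind (maps.length * w) st.1 (cidx w p);
     (fr.1, st.2.insert fr.2 (st.2.getD fr.2 0 + chVal (mget maps p.1 p.2))))
  else st

theorem subSum_cons (maps : List String) (w : Nat) (q : Nat × Nat) (rest : List (Nat × Nat))
    (s : Nat × Nat) :
    subSum maps w (q :: rest) s =
      (if mget maps q.1 q.2 ≠ 'X' ∧ rootOf maps w q = rootOf maps w s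
       then valAt maps q else 0) + subSum maps w rest s := by
  unfold subSum
  rw [List.filter_cons]
  by_cases h1 : mget maps q.1 q.2 ≠ 'X' <;> by_cases h2 : rootOf maps w q = rootOf maps w s <;>
    simp [h1, h2]

-- the coupled scan: A's flood-fill scan and B's root-accumulation scan produce matching results
theorem scanAB (maps : List String) (w : Nat)
    (hrow : ∀ row ∈ maps, w ≤ row.toList.length) :
    ∀ (todo : List (Nat × Nat)), (∀ p ∈ todo, p.1 < maps.length ∧ p.2 < w) → todo.Nodup →
    ∀ (L : List (Nat × Nat)) (g : List (List Char)) (par : List Nat) (d : PySem.Dict Nat Int),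
    (∀ ℓ ∈ L, isLand maps w ℓ) →
    L.Pairwise (fun a b => rootOf maps w a ≠ rootOf maps w b) →
    Coup maps (fun p => ∃ ℓ ∈ L, Conn maps w ℓ p) g →
    (∀ p, isLand maps w p → p ∉ todo → ∃ ℓ ∈ L, rootOf maps w p = rootOf maps w ℓ) →
    DSUInv (maps.length * w) par →
    (∀ k, sroot par (maps.length * w) k = sroot (unionPar maps w) (maps.length * w) k) →
    d.items = L.map (fun ℓ => (rootOf maps w ℓ, compSum maps w ℓ - subSum maps w todo ℓ)) →
    ∃ (L' : List (Nat × Nat)) (g' : List (List Char)) (par' : List Nat) (d' : PySem.Dict Nat Int),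
      todo.foldl (stepScanA maps w) (g, L.map (compSum maps w)) = (g', L'.map (compSum maps w)) ∧
      todo.foldl (stepScanB maps w) (par, d) = (par', d') ∧
      d'.items = L'.map (fun ℓ => (rootOf maps w ℓ, compSum maps w ℓ)) := by
  intro todo
  induction todo with
  | nil =>
    intro _ _ L g par d hLl hLd hC hCov hInv hpar hitems
    refine ⟨L, g, par, d, rfl, rfl, ?_⟩
    rw [hitems]
    apply List.map_congr_left
    intro ℓ _
    rw [subSum_nil, sub_zero]
  | cons q rest ih =>
    intro hin hnd L g par d hLl hLd hC hCov hInv hpar hitems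
    have hq := hin q (List.mem_cons_self ..)
    have hrest_in : ∀ p ∈ rest, p.1 < maps.length ∧ p.2 < w :=
      fun p hp => hin p (List.mem_cons_of_mem _ hp)
    have hrest_nd : rest.Nodup := hnd.of_cons
    have hqnr : q ∉ rest := (List.nodup_cons.mp hnd).1
    have hkeys : d.keys = L.map (rootOf maps w) := by
      simp only [PySem.Dict.keys, hitems, List.map_map]
      rfl
    have hknd : d.keys.Nodup := by
      rw [hkeys]
      exact List.Pairwise.map _ (fun a b hab => hab) hLd
    simp only [List.foldl_cons]
    by_cases hland : mget maps q.1 q.2 ≠ 'X'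
    case neg =>
      -- water: both scans skip, nothing changes
      have hmX : mget maps q.1 q.2 = 'X' := not_not.mp hland
      have hgX : ¬ gget g q.1 q.2 ≠ 'X' := by
        by_cases hS : ∃ ℓ ∈ L, Conn maps w ℓ q
        · intro hc; exact hc ((hC.2.2 q).1 hS)
        · intro hc; apply hc; rw [(hC.2.2 q).2 hS]; exact hmX
      have hstepA : stepScanA maps w (g, L.map (compSum maps w)) q = (g, L.map (compSum maps w)) := by
        simp only [stepScanA]
        rw [if_neg hgX]
      have hstepB : stepScanB maps w (par, d) q = (par, d) := by
        simp only [stepScanB]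
        rw [if_neg (not_not.mpr hmX)]
      rw [hstepA, hstepB]
      apply ih hrest_in hrest_nd L g par d hLl hLd hC ?_ hInv hpar ?_
      · intro p hp hnp
        apply hCov p hp
        intro hc
        rcases List.mem_cons.mp hc with hc | hc
        · rw [hc] at hp; exact hland hp.2.2
        · exact hnp hc
      · rw [hitems]
        apply List.map_congr_left
        intro ℓ _
        rw [subSum_cons, if_neg (fun hc => hland hc.1), zero_add]
    case pos =>
      have hislq : isLand maps w q := ⟨hq.1, hq.2, hland⟩
      have hcq : cidx w q < maps.length * w := cidx_lt maps.length w q hq.1 hq.2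
      obtain ⟨hfr2, hfrInv, hfrR⟩ := dsuFind_spec hInv (cidx w q) hcq
      have hfr2' : (dsuFind (maps.length * w) par (cidx w q)).2 = rootOf maps w q := by
        rw [hfr2, hpar]
        rfl
      have hparnew : ∀ k, sroot (dsuFind (maps.length * w) par (cidx w q)).1 (maps.length * w) k =
          sroot (unionPar maps w) (maps.length * w) k :=
        fun k => (hfrR k).trans (hpar k)
      have hstepB : stepScanB maps w (par, d) q =
          ((dsuFind (maps.length * w) par (cidx w q)).1,
           d.insert (rootOf maps w q)
             (d.getD (rootOf maps w q) 0 + chVal (mget maps q.1 q.2))) := by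
        simp only [stepScanB]
        rw [if_pos hland, hfr2']
      by_cases hfresh : ∃ ℓ ∈ L, rootOf maps w q = rootOf maps w ℓ
      case pos =>
        -- follower: A skips (cell already flooded), B accumulates into the existing key
        obtain ⟨ℓ0, hℓ0L, hρ⟩ := hfresh
        have hSq : ∃ ℓ ∈ L, Conn maps w ℓ q :=
          ⟨ℓ0, hℓ0L, same_conn maps w ℓ0 q (hLl _ hℓ0L) hislq hρ.symm⟩
        have hgX : gget g q.1 q.2 = 'X' := (hC.2.2 q).1 hSq
        have hstepA : stepScanA maps w (g, L.map (compSum maps w)) q = (g, L.map (compSum maps w)) := by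
          simp only [stepScanA]
          rw [if_neg (not_not.mpr hgX)]
        have hcont : d.contains (rootOf maps w q) = true := by
          rw [PySem.Dict.contains_eq_decide_mem_keys, hkeys]
          simp only [decide_eq_true_eq]
          exact hρ ▸ List.mem_map_of_mem hℓ0L
        have hitems' :
            (d.insert (rootOf maps w q) (d.getD (rootOf maps w q) 0 + chVal (mget maps q.1 q.2))).items =
            L.map (fun ℓ => (rootOf maps w ℓ, compSum maps w ℓ - subSum maps w rest ℓ)) := by
          rw [PySem.Dict.items_insert_of_contains d _ hcont, hitems, List.map_map]
          apply List.map_congr_left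
          intro ℓ hℓ
          simp only [Function.comp]
          by_cases hc : rootOf maps w ℓ = rootOf maps w q
          · have hbeq : (rootOf maps w ℓ == rootOf maps w q) = true := beq_iff_eq.mpr hc
            simp only [hbeq, if_true]
            have hmem : ((rootOf maps w q, compSum maps w ℓ - subSum maps w (q :: rest) ℓ) : Nat × Int)
                ∈ d.items := by
              rw [hitems, ← hc]
              exact List.mem_map_of_mem hℓ
            have hgetD : d.getD (rootOf maps w q) 0 =
                compSum maps w ℓ - subSum maps w (q :: rest) ℓ :=
              PySem.Dict.getD_of_mem_items d hmem hknd 0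
            rw [hgetD]
            refine Prod.ext hc.symm ?_
            show compSum maps w ℓ - subSum maps w (q :: rest) ℓ + chVal (mget maps q.1 q.2) =
              compSum maps w ℓ - subSum maps w rest ℓ
            rw [subSum_cons, if_pos ⟨hland, hc.symm⟩]
            show compSum maps w ℓ - (valAt maps q + subSum maps w rest ℓ) + valAt maps q = _
            ring
          · have hbeq : (rootOf maps w ℓ == rootOf maps w q) = false := by
              simp [hc]
            simp only [hbeq, Bool.false_eq_true, if_false]
            rw [subSum_cons, if_neg (fun hcc => hc hcc.2.symm), zero_add]
        rw [hstepA, hstepB]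
        apply ih hrest_in hrest_nd L g _ _ hLl hLd hC ?_ hfrInv hparnew hitems'
        intro p hp hnp
        by_cases hpq : p = q
        · exact ⟨ℓ0, hℓ0L, by rw [hpq]; exact hρ⟩
        · exact hCov p hp (by
            intro hc
            rcases List.mem_cons.mp hc with hc | hc
            · exact hpq hc
            · exact hnp hc)
      case neg =>
        -- leader: A floods the whole island of q, B opens a fresh key with q's value
        have hfresh' : ∀ ℓ ∈ L, rootOf maps w q ≠ rootOf maps w ℓ := by
          intro ℓ hm hc
          exact hfresh ⟨ℓ, hm, hc⟩
        have hS : ¬ ∃ ℓ ∈ L, Conn maps w ℓ q := by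
          rintro ⟨ℓ, hm, hconn⟩
          exact hfresh' ℓ hm (conn_same maps w ℓ q (hLl _ hm) hconn).symm
        have hgv : gget g q.1 q.2 = mget maps q.1 q.2 := (hC.2.2 q).2 hS
        have hgq : gget g q.1 q.2 ≠ 'X' := by rw [hgv]; exact hland
        -- pack: the flood invariant for the singleton start
        have hSclosed : ∀ p, (∃ ℓ ∈ L, Conn maps w ℓ p) →
            ∀ r, stepRel maps w (fun _ => False) p r → ∃ ℓ ∈ L, Conn maps w ℓ r := by
          rintro p ⟨ℓ, hm, hconn⟩ r hstep
          exact ⟨ℓ, hm, hconn.tail hstep⟩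
        have hVG : VGood maps w (fun p => ∃ ℓ ∈ L, Conn maps w ℓ p) q {q} := by
          intro p hp
          rw [Finset.mem_singleton] at hp
          subst hp
          exact ⟨hislq, hS, Relation.ReflTransGen.refl⟩
        have hmemV : q ∈ ({q} : Finset (Nat × Nat)) := Finset.mem_singleton_self _
        have hrowq : q.2 < (g.getD q.1 []).length := by
          have h1 : (g.getD q.1 []).length = (maps.getD q.1 "").toList.length := hC.2.1 q.1
          have h2 : maps.getD q.1 "" ∈ maps := by
            rw [List.getD_eq_getElem?_getD, List.getElem?_eq_getElem hq.1]
            exact List.getElem_mem _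
          have := hrow _ h2
          omega
        have hCoupA : Coup maps
            (fun p => (∃ ℓ ∈ L, Conn maps w ℓ p) ∨ p ∈ ({q} : Finset (Nat × Nat)))
            (gset g q.1 q.2) := by
          refine ⟨by rw [gset_length]; exact hC.1,
            fun y' => by rw [gset_row_length]; exact hC.2.1 y', ?_⟩
          intro p
          constructor
          · intro hp
            by_cases hpq : p = q
            · rw [hpq]
              have : (q.1, q.2) = q := rfl
              rw [← this]
              exact gget_gset_self g q.1 q.2 (by rw [hC.1]; exact hq.1) hrowq
            · rw [gget_gset_other g q.1 q.2 p.1 p.2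
                (by simpa [Prod.ext_iff] using hpq)]
              have hpS : ∃ ℓ ∈ L, Conn maps w ℓ p := by
                rcases hp with h | h
                · exact h
                · rw [Finset.mem_singleton] at h; exact absurd h hpq
              exact (hC.2.2 p).1 hpS
          · intro hp
            have hpq : p ≠ q := by
              intro hc; exact hp (Or.inr (by rw [hc]; exact hmemV))
            rw [gget_gset_other g q.1 q.2 p.1 p.2 (by simpa [Prod.ext_iff] using hpq)]
            exact (hC.2.2 p).2 (fun hc => hp (Or.inl hc))
        have hn1 : 1 ≤ maps.length * w := by omega
        obtain ⟨V', g', hsubV, hsV, hVG', hVC', hC', heqA⟩ :=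
          bfsA_run maps w hrow (fun p => ∃ ℓ ∈ L, Conn maps w ℓ p) q (maps.length * w + 1)
            (gset g q.1 q.2) [(q.1, q.2)] (chVal (gget g q.1 q.2)) {q} hVG hmemV hCoupA
            (by intro p hp
                rw [List.mem_singleton] at hp
                rw [hp]
                exact hmemV)
            (List.nodup_singleton _)
            (by intro p hp hnp r hstep
                rw [Finset.mem_singleton] at hp
                exact absurd (by rw [hp]; exact List.mem_singleton_self _) hnp)
            (by rw [hgv, Finset.sum_singleton]; rfl)
            (by simp only [List.length_singleton, Finset.card_singleton]; omega)
        -- the flooded set is exactly q's component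
        have hWq : q ∈ compCells maps w q := by
          unfold compCells
          rw [Finset.mem_filter, Finset.mem_product, Finset.mem_range, Finset.mem_range]
          exact ⟨⟨hq.1, hq.2⟩, hland, rfl⟩
        have hWgood : VGood maps w (fun p => ∃ ℓ ∈ L, Conn maps w ℓ p) q (compCells maps w q) := by
          intro p hp
          unfold compCells at hp
          rw [Finset.mem_filter, Finset.mem_product, Finset.mem_range, Finset.mem_range] at hp
          obtain ⟨⟨hp1, hp2⟩, hp3, hp4⟩ := hp
          have hplandW : isLand maps w p := ⟨hp1, hp2, hp3⟩
          have hnotS : ¬ ∃ ℓ ∈ L, Conn maps w ℓ p := by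
            rintro ⟨ℓ, hm, hconn⟩
            apply hfresh' ℓ hm
            rw [← hp4]
            exact (conn_same maps w ℓ p (hLl _ hm) hconn).symm
          have hconnqp : Conn maps w q p := same_conn maps w q p hislq hplandW hp4.symm
          exact ⟨hplandW, hnotS,
            (reachS_of_conn maps w _ hSclosed q hislq hS p hconnqp).1⟩
        have hWclosed : VClosed maps w (fun p => ∃ ℓ ∈ L, Conn maps w ℓ p) (compCells maps w q) := by
          intro p hp r hstep
          unfold compCells at hp ⊢
          rw [Finset.mem_filter, Finset.mem_product, Finset.mem_range, Finset.mem_range] at hp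
          obtain ⟨⟨hp1, hp2⟩, hp3, hp4⟩ := hp
          have hplandW : isLand maps w p := ⟨hp1, hp2, hp3⟩
          have hrland : isLand maps w r := hstep.2.1
          rw [Finset.mem_filter, Finset.mem_product, Finset.mem_range, Finset.mem_range]
          refine ⟨⟨hrland.1, hrland.2.1⟩, hrland.2.2, ?_⟩
          rw [← hp4]
          exact (adj_same maps w p r hplandW hrland hstep.1).symm
        have hVeq : V' = compCells maps w q :=
          flood_unique maps w _ q V' (compCells maps w q) hsV hVG' hVC' hWq hWgood hWclosed
        have hsum : (∑ p ∈ V', valAt maps p) = compSum maps w q := by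
          rw [hVeq]
          rfl
        have hstepA : stepScanA maps w (g, L.map (compSum maps w)) q =
            (g', (L ++ [q]).map (compSum maps w)) := by
          simp only [stepScanA]
          rw [if_pos hgq]
          simp only [heqA, hsum]
          rw [List.map_append]
          rfl
        -- B: fresh key appended
        have hncont : d.contains (rootOf maps w q) = false := by
          rw [PySem.Dict.contains_eq_decide_mem_keys, hkeys]
          simp only [decide_eq_false_iff_not, List.mem_map, not_exists]
          rintro ℓ ⟨hm, hc⟩
          exact hfresh' ℓ hm hc.symm
        have hgetD0 : d.getD (rootOf maps w q) 0 = 0 :=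
          PySem.Dict.getD_of_not_contains d 0 hncont
        -- q's component splits as q plus the unscanned remainder
        have hsplit : compSum maps w q = valAt maps q + subSum maps w rest q := by
          have hfl : (rest.filter (fun p => decide (mget maps p.1 p.2 ≠ 'X') &&
              decide (rootOf maps w p = rootOf maps w q))).Nodup := hrest_nd.filter _
          have htf : (rest.filter (fun p => decide (mget maps p.1 p.2 ≠ 'X') &&
              decide (rootOf maps w p = rootOf maps w q))).toFinset =
              (compCells maps w q).erase q := by
            ext p
            rw [List.mem_toFinset, List.mem_filter, Finset.mem_erase]
            unfold compCells
            rw [Finset.mem_filter, Finset.mem_product, Finset.mem_range, Finset.mem_range]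
            constructor
            · rintro ⟨hpr, hcond⟩
              simp only [Bool.and_eq_true, decide_eq_true_eq] at hcond
              have hpin := hrest_in p hpr
              exact ⟨fun hc => hqnr (hc ▸ hpr), ⟨hpin.1, hpin.2⟩, hcond.1, hcond.2⟩
            · rintro ⟨hpq, ⟨hp1, hp2⟩, hp3, hp4⟩
              have hpland : isLand maps w p := ⟨hp1, hp2, hp3⟩
              have hptodo : p ∈ q :: rest := by
                by_contra hc
                obtain ⟨ℓ, hm, hcc⟩ := hCov p hpland hc
                exact hfresh' ℓ hm (hp4 ▸ hcc)
              rcases List.mem_cons.mp hptodo with hc | hc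
              · exact absurd hc hpq
              · exact ⟨hc, by simp only [Bool.and_eq_true, decide_eq_true_eq]; exact ⟨hp3, hp4⟩⟩
          have hsub : subSum maps w rest q = ∑ p ∈ (compCells maps w q).erase q, valAt maps p := by
            unfold subSum
            rw [← List.sum_toFinset _ hfl, htf]
          rw [hsub, Finset.add_sum_erase _ _ hWq]
          rfl
        have hitems' :
            (d.insert (rootOf maps w q) (d.getD (rootOf maps w q) 0 + chVal (mget maps q.1 q.2))).items =
            (L ++ [q]).map (fun ℓ => (rootOf maps w ℓ, compSum maps w ℓ - subSum maps w rest ℓ)) := by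
          rw [PySem.Dict.items_insert_of_not_contains d _ hncont, hitems, List.map_append]
          congr 1
          · apply List.map_congr_left
            intro ℓ hℓ
            rw [subSum_cons, if_neg (fun hcc => hfresh' ℓ hℓ hcc.2), zero_add]
          · rw [hgetD0]
            simp only [List.map_cons, List.map_nil]
            refine congrArg (· :: []) (Prod.ext rfl ?_)
            show (0 : Int) + chVal (mget maps q.1 q.2) = compSum maps w q - subSum maps w rest q
            rw [hsplit]
            show (0 : Int) + valAt maps q = valAt maps q + subSum maps w rest q - subSum maps w rest q
            ring
        rw [hstepA, hstepB]
        have hLl' : ∀ ℓ ∈ L ++ [q], isLand maps w ℓ := by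
          intro ℓ hℓ
          rcases List.mem_append.mp hℓ with h | h
          · exact hLl ℓ h
          · rw [List.mem_singleton.mp h]; exact hislq
        have hLd' : (L ++ [q]).Pairwise (fun a b => rootOf maps w a ≠ rootOf maps w b) := by
          rw [List.pairwise_append]
          refine ⟨hLd, List.pairwise_singleton _ _, ?_⟩
          intro a ha b hb
          rw [List.mem_singleton.mp hb]
          exact fun hc => hfresh' a ha hc.symm
        have hC'' : Coup maps (fun p => ∃ ℓ ∈ L ++ [q], Conn maps w ℓ p) g' := by
          apply coup_congr maps (fun p => (∃ ℓ ∈ L, Conn maps w ℓ p) ∨ p ∈ V') _ g' ?_ hC'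
          intro p
          constructor
          · rintro (⟨ℓ, hm, hconn⟩ | hv)
            · exact ⟨ℓ, List.mem_append.mpr (Or.inl hm), hconn⟩
            · refine ⟨q, List.mem_append.mpr (Or.inr (List.mem_singleton_self _)), ?_⟩
              rw [hVeq] at hv
              unfold compCells at hv
              rw [Finset.mem_filter, Finset.mem_product, Finset.mem_range, Finset.mem_range] at hv
              obtain ⟨⟨hp1, hp2⟩, hp3, hp4⟩ := hv
              exact same_conn maps w q p hislq ⟨hp1, hp2, hp3⟩ hp4.symm
          · rintro ⟨ℓ, hm, hconn⟩
            rcases List.mem_append.mp hm with h | h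
            · exact Or.inl ⟨ℓ, h, hconn⟩
            · right
              rw [List.mem_singleton.mp h] at hconn
              have hpland : isLand maps w p := reach_land maps w _ q p hislq hconn
              rw [hVeq]
              unfold compCells
              rw [Finset.mem_filter, Finset.mem_product, Finset.mem_range, Finset.mem_range]
              exact ⟨⟨hpland.1, hpland.2.1⟩, hpland.2.2,
                (conn_same maps w q p hislq hconn).symm⟩
        apply ih hrest_in hrest_nd (L ++ [q]) g' _ _ hLl' hLd' hC'' ?_ hfrInv hparnew hitems'
        intro p hp hnp
        by_cases hpq : p = q
        · exact ⟨q, List.mem_append.mpr (Or.inr (List.mem_singleton_self _)), by rw [hpq]⟩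
        · obtain ⟨ℓ, hm, hc⟩ := hCov p hp (by
            intro hc
            rcases List.mem_cons.mp hc with hc | hc
            · exact hpq hc
            · exact hnp hc)
          exact ⟨ℓ, List.mem_append.mpr (Or.inl hm), hc⟩

theorem map_toList_getD (maps : List String) (y : Nat) :
    (maps.map String.toList).getD y [] = (maps.getD y "").toList := by
  cases h : maps[y]? <;>
    simp [List.getD_eq_getElem?_getD, List.getElem?_map, h]

theorem solutionA_eq (r0 : String) (rest : List String) :
    solution (r0 :: rest) =
      (let res := (((List.range (r0 :: rest).length).flatMap
          (fun y => (List.range r0.toList.length).map (fun x => (y, x)))).foldl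
          (stepScanA (r0 :: rest) r0.toList.length) ((r0 :: rest).map String.toList, ([] : List Int)));
       if res.2.length = 0 then [-1] else PySem.List.sorted res.2 (fun v => v) false) := by
  simp only [solution, List.length_map]
  rw [foldl_nested (f := fun st y x =>
    if gget st.1 y x ≠ 'X' then
      (let tmp0 := chVal (gget st.1 y x);
       let r := bfsA (r0 :: rest).length r0.toList.length ((r0 :: rest).length * r0.toList.length + 1)
         (gset st.1 y x) [(y, x)] tmp0;
       (r.2, st.2 ++ [r.1]))
    else st)]
  rfl

theorem solutionB_eq (r0 : String) (rest : List String) :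
    solution_alt (r0 :: rest) =
      (let res := (((List.range (r0 :: rest).length).flatMap
          (fun y => (List.range r0.toList.length).map (fun x => (y, x)))).foldl
          (stepScanB (r0 :: rest) r0.toList.length)
          (unionPar (r0 :: rest) r0.toList.length, (PySem.Dict.empty : PySem.Dict Nat Int)));
       if res.2.values = [] then [-1] else PySem.List.sorted res.2.values (fun v => v) false) := by
  simp only [solution_alt]
  rw [foldl_nested (f := fun (par : List Nat) y x =>
    if mget (r0 :: rest) y x ≠ 'X' then
      (let i := y * r0.toList.length + x
       let par1 :=
         if x + 1 < r0.toList.length ∧ mget (r0 :: rest) y (x + 1) ≠ 'X' then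
           dsuUnion ((r0 :: rest).length * r0.toList.length) par i (i + 1)
         else par
       if y + 1 < (r0 :: rest).length ∧ mget (r0 :: rest) (y + 1) x ≠ 'X' then
         dsuUnion ((r0 :: rest).length * r0.toList.length) par1 i (i + r0.toList.length)
       else par1)
    else par)]
  rw [foldl_nested (f := fun (st : List Nat × PySem.Dict Nat Int) y x =>
    if mget (r0 :: rest) y x ≠ 'X' then
      (let fr := dsuFind ((r0 :: rest).length * r0.toList.length) st.1 (y * r0.toList.length + x);
       (fr.1, st.2.insert fr.2 (st.2.getD fr.2 0 + chVal (mget (r0 :: rest) y x))))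
    else st)]
  rfl

-- ===== VERDICT (by name: the statement is the Claim_ definition above) =====
theorem solution_spec : Claim_equal_solution := by
  unfold Claim_equal_solution
  intro maps _ hpre
  unfold Spec_solution
  obtain ⟨hne, hrows⟩ := hpre
  cases maps with
  | nil => exact absurd rfl hne
  | cons r0 rest =>
    have hrow : ∀ row ∈ r0 :: rest, r0.toList.length ≤ row.toList.length := by
      intro row h
      have := (hrows row h).1
      simpa using this
    have hCoup0 : Coup (r0 :: rest)
        (fun p => ∃ ℓ ∈ ([] : List (Nat × Nat)), Conn (r0 :: rest) r0.toList.length ℓ p)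
        ((r0 :: rest).map String.toList) := by
      refine ⟨by simp, fun y => by rw [map_toList_getD], ?_⟩
      intro p
      constructor
      · rintro ⟨ℓ, hℓ, _⟩
        cases hℓ
      · intro _
        unfold gget mget
        rw [map_toList_getD]
    obtain ⟨L', g', par', d', hA, hB, hitems'⟩ :=
      scanAB (r0 :: rest) r0.toList.length hrow
        (((List.range (r0 :: rest).length).flatMap
          (fun y => (List.range r0.toList.length).map (fun x => (y, x)))))
        (fun p hp => mem_flat_pos _ _ p hp)
        (allPos_nodup _ _)
        [] ((r0 :: rest).map String.toList) (unionPar (r0 :: rest) r0.toList.length)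
        PySem.Dict.empty
        (by intro ℓ hℓ; cases hℓ)
        (List.Pairwise.nil)
        hCoup0
        (by intro p hp hnp
            exact absurd (pos_mem_flat _ _ p hp.1 hp.2.1) hnp)
        (unionPar_good (r0 :: rest) r0.toList.length).1
        (fun k => rfl)
        rfl
    have hvals : d'.values = L'.map (compSum (r0 :: rest) r0.toList.length) := by
      simp only [PySem.Dict.values, hitems', List.map_map]
      rfl
    rw [solutionA_eq, solutionB_eq]
    simp only [List.map_nil] at hA
    simp only [hA, hB]
    show (if (L'.map (compSum (r0 :: rest) r0.toList.length)).length = 0 then [-1]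
          else PySem.List.sorted (L'.map (compSum (r0 :: rest) r0.toList.length)) (fun v => v) false) =
         (if d'.values = [] then [-1] else PySem.List.sorted d'.values (fun v => v) false)
    rw [hvals]
    cases L'.map (compSum (r0 :: rest) r0.toList.length) with
    | nil => simp
    | cons a t => rw [if_neg (by simp), if_neg (by simp)]
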